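-- pv_equiv track=rewrite | github.com/jjoshua2/arc_agi | unsolved/2025-10-12T21-35-09Z/e73095fd_best1.py | transform
-- ===== SOURCE A (Python) =====
-- def transform(grid: list[list[int]]) -> list[list[int]]:
--     if not grid or not grid[0]:
--         return []
--     h = len(grid)
--     w = len(grid[0])
--     output = [row[:] for row in grid]
--     visited = [[False] * w for _ in range(h)]
--     directions = [(-1, 0), (1, 0), (0, -1), (0, 1)]
--
--     def dfs(i, j, component):
--         stack = [(i, j)]
--         visited[i][j] = True
--         component.append((i, j))
--         while stack:
--             x, y = stack.pop()
--             for dx, dy in directions: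
--                 nx, ny = x + dx, y + dy
--                 if 0 <= nx < h and 0 <= ny < w and not visited[nx][ny] and grid[nx][ny] == 0:
--                     visited[nx][ny] = True
--                     stack.append((nx, ny))
--                     component.append((nx, ny))
--
--     for i in range(h):
--         for j in range(w):
--             if grid[i][j] == 0 and not visited[i][j]:
--                 component = []
--                 dfs(i, j, component)
--                 borders = set()
--                 for x, y in component:
--                     if x == 0:
--                         borders.add('top')
--                     if x == h - 1:
--                         borders.add('bottom')
--                     if y == 0:
--                         borders.add('left')
--                     if y == w - 1:
--                         borders.add('right')
--                 if len(borders) <= 1: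
--                     for x, y in component:
--                         output[x][y] = 4
--     return output
-- ===== SOURCE B (Python) =====
-- def transform(grid: list[list[int]]) -> list[list[int]]:
--     if not grid or not grid[0]:
--         return []
--     h, w = len(grid), len(grid[0])
--     none = (False, False, False, False)
--     masks = [[(i == 0, i == h - 1, j == 0, j == w - 1)
--               if grid[i][j] == 0 else none
--               for j in range(w)] for i in range(h)]
--     for _ in range(4 * h * w):
--         new = [[_union(masks[i][j],
--                        masks[i - 1][j] if i > 0 else none,
--                        masks[i + 1][j] if i + 1 < h else none,
--                        masks[i][j - 1] if j > 0 else none,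
--                        masks[i][j + 1] if j + 1 < w else none)
--                 if grid[i][j] == 0 else none
--                 for j in range(w)] for i in range(h)]
--         if new == masks:
--             break
--         masks = new
--     return [[4 if j < w and grid[i][j] == 0 and _touch(masks[i][j]) <= 1 else v
--              for j, v in enumerate(row)] for i, row in enumerate(grid)]
--
--
-- def _union(a, b, c, d, e):
--     return (a[0] or b[0] or c[0] or d[0] or e[0],
--             a[1] or b[1] or c[1] or d[1] or e[1],
--             a[2] or b[2] or c[2] or d[2] or e[2],
--             a[3] or b[3] or c[3] or d[3] or e[3])
--
--
-- def _touch(m):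
--     return int(m[0]) + int(m[1]) + int(m[2]) + int(m[3])
-- ===== Notes on version B (the rewrite author's own statement) =====
-- stated objective: alternative
-- what changed: Replaces A's per-component stack DFS (shared visited matrix, component lists, in-place writes) with a whole-grid monotone fixpoint: each zero cell carries four border-side flags that are repeatedly OR-propagated to neighbouring zero cells until stable, and a cell is filled with 4 iff at most one flag is set; no components, no visited matrix, no mutation.
import Mathlib
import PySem

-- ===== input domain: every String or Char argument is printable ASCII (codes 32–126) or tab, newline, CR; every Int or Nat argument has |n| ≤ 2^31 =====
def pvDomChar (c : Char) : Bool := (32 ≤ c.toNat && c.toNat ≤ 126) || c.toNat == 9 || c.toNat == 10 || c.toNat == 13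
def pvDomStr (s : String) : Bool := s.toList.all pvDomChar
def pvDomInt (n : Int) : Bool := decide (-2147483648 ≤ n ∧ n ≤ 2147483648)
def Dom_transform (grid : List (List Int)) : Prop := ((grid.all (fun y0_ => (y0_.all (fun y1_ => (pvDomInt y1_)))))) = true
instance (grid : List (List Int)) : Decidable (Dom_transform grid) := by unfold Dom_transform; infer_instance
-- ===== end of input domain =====

-- B replaces A's per-component stack DFS (shared visited matrix, component lists, in-place
-- writes) by a whole-grid monotone fixpoint that propagates four per-cell border-side flags
-- between neighbouring zero cells until stable; objective: alternative (no speed claim).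

-- ===== PORT A =====
-- grid[i][j], read by both ports only after Python's bound checks (exact there under Pre_)
def pvAcell (grid : List (List Int)) (i j : Int) : Int :=
  PySem.List.pyGetD (PySem.List.pyGetD grid i []) j 1

-- visited[i][j], read only in bounds
def pvAvis (vis : List (List Bool)) (i j : Int) : Bool :=
  PySem.List.pyGetD (PySem.List.pyGetD vis i []) j true

-- m[x][y] = v (in-bounds two-dimensional assignment)
def pvSet2 {α : Type} (m : List (List α)) (x y : Int) (v : α) : List (List α) :=
  PySem.List.pySetD m x (PySem.List.pySetD (PySem.List.pyGetD m x []) y v)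

def pvDirs : List (Int × Int) := [(-1, 0), (1, 0), (0, -1), (0, 1)]

-- the 'while stack:' loop of A's dfs; stack top = list head (Python: end of the list)
def pvDfsLoop (grid : List (List Int)) (h w : Int) :
    Nat → List (List Bool) → List (Int × Int) → List (Int × Int) →
    List (List Bool) × List (Int × Int)
  | 0, vis, comp, _ => (vis, comp)
  | _ + 1, vis, comp, [] => (vis, comp)
  | fuel + 1, vis, comp, (x, y) :: rest =>
    let st := pvDirs.foldl (fun (st : List (List Bool) × List (Int × Int) × List (Int × Int)) d =>
      let nx := x + d.1
      let ny := y + d.2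
      if 0 ≤ nx ∧ nx < h ∧ 0 ≤ ny ∧ ny < w ∧ ¬ pvAvis st.1 nx ny = true ∧ pvAcell grid nx ny = 0 then
        (pvSet2 st.1 nx ny true, st.2.1 ++ [(nx, ny)], (nx, ny) :: st.2.2)
      else st) (vis, comp, rest)
    pvDfsLoop grid h w fuel st.1 st.2.1 st.2.2

def pvDfs (grid : List (List Int)) (h w i j : Int) (vis : List (List Bool)) :
    List (List Bool) × List (Int × Int) :=
  pvDfsLoop grid h w (2 * (h * w).toNat + 1) (pvSet2 vis i j true) [(i, j)] [(i, j)]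

def transform (grid : List (List Int)) : List (List Int) :=
  if grid = [] ∨ grid.headD [] = [] then [] else
    let h : Int := PySem.List.len grid
    let w : Int := PySem.List.len (grid.headD [])
    let output := grid.map (fun row => PySem.List.slice row none none)
    let visited := (PySem.List.pyRange 0 h 1).map (fun _ =>
      (PySem.List.pyRange 0 w 1).map (fun _ => false))
    let st := (PySem.List.pyRange 0 h 1).foldl (fun st i =>
      (PySem.List.pyRange 0 w 1).foldl (fun (st : List (List Int) × List (List Bool)) j =>
        if pvAcell grid i j = 0 ∧ ¬ pvAvis st.2 i j = true then
          let r := pvDfs grid h w i j st.2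
          let borders := r.2.foldl (fun (b : PySem.Set String) c =>
            let b := if c.1 = 0 then PySem.Set.add b "top" else b
            let b := if c.1 = h - 1 then PySem.Set.add b "bottom" else b
            let b := if c.2 = 0 then PySem.Set.add b "left" else b
            if c.2 = w - 1 then PySem.Set.add b "right" else b) PySem.Set.empty
          (if PySem.List.len borders ≤ 1 then
              r.2.foldl (fun o (c : Int × Int) => pvSet2 o c.1 c.2 (4 : Int)) st.1
            else st.1, r.1)
        else st) st) (output, visited)
    st.1

-- ===== PORT B =====
def pvNone4 : Bool × Bool × Bool × Bool := (false, false, false, false)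

def pvUnion5 (a b c d e : Bool × Bool × Bool × Bool) : Bool × Bool × Bool × Bool :=
  (a.1 || b.1 || c.1 || d.1 || e.1,
   a.2.1 || b.2.1 || c.2.1 || d.2.1 || e.2.1,
   a.2.2.1 || b.2.2.1 || c.2.2.1 || d.2.2.1 || e.2.2.1,
   a.2.2.2 || b.2.2.2 || c.2.2.2 || d.2.2.2 || e.2.2.2)

def pvTouch (m : Bool × Bool × Bool × Bool) : Int :=
  (if m.1 then 1 else 0) + (if m.2.1 then 1 else 0) +
  (if m.2.2.1 then 1 else 0) + (if m.2.2.2 then 1 else 0)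

-- masks[i][j] (read only in bounds)
def pvMget (m : List (List (Bool × Bool × Bool × Bool))) (i j : Int) : Bool × Bool × Bool × Bool :=
  PySem.List.pyGetD (PySem.List.pyGetD m i []) j pvNone4

-- one propagation round (the comprehension building 'new')
def pvStep (grid : List (List Int)) (h w : Int)
    (m : List (List (Bool × Bool × Bool × Bool))) : List (List (Bool × Bool × Bool × Bool)) :=
  (PySem.List.pyRange 0 h 1).map (fun i =>
    (PySem.List.pyRange 0 w 1).map (fun j =>
      if pvAcell grid i j = 0 then
        pvUnion5 (pvMget m i j)
          (if 0 < i then pvMget m (i - 1) j else pvNone4)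
          (if i + 1 < h then pvMget m (i + 1) j else pvNone4)
          (if 0 < j then pvMget m i (j - 1) else pvNone4)
          (if j + 1 < w then pvMget m i (j + 1) else pvNone4)
      else pvNone4))

-- the 'for _ in range(4*h*w): … if new == masks: break' loop
def pvBloop (grid : List (List Int)) (h w : Int) :
    Nat → List (List (Bool × Bool × Bool × Bool)) → List (List (Bool × Bool × Bool × Bool))
  | 0, m => m
  | fuel + 1, m =>
    let new := pvStep grid h w m
    if new = m then m else pvBloop grid h w fuel new

def transform_alt (grid : List (List Int)) : List (List Int) :=
  if grid = [] ∨ grid.headD [] = [] then [] else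
    let h : Int := PySem.List.len grid
    let w : Int := PySem.List.len (grid.headD [])
    let masks0 := (PySem.List.pyRange 0 h 1).map (fun i =>
      (PySem.List.pyRange 0 w 1).map (fun j =>
        if pvAcell grid i j = 0 then
          (decide (i = 0), decide (i = h - 1), decide (j = 0), decide (j = w - 1))
        else pvNone4))
    let masks := pvBloop grid h w (4 * (h * w)).toNat masks0
    (PySem.List.enumerate grid).map (fun ir =>
      (PySem.List.enumerate ir.2).map (fun jv =>
        if jv.1 < w ∧ pvAcell grid ir.1 jv.1 = 0 ∧ pvTouch (pvMget masks ir.1 jv.1) ≤ 1 then 4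
        else jv.2))

-- ===== PRECONDITION & SPEC =====
-- Pre_ excludes exactly the grids on which Python A raises an IndexError: a nonempty grid with a
-- nonempty first row where some row is shorter than the first row (A reads grid[i][j] for every
-- j < len(grid[0])).  Rows longer than the first row are allowed.
def Pre_transform (grid : List (List Int)) : Prop :=
  grid = [] ∨ grid.headD [] = [] ∨ ∀ row ∈ grid, (grid.headD []).length ≤ row.length

instance (grid : List (List Int)) : Decidable (Pre_transform grid) := by
  unfold Pre_transform; infer_instance

def pvWitness_transform : List (List Int) := [[0, 1], [1, 0]]

def Spec_transform (grid : List (List Int)) (out : List (List Int)) : Prop := out = transform_alt grid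
instance (grid : List (List Int)) (out : List (List Int)) : Decidable (Spec_transform grid out) := by
  unfold Spec_transform; infer_instance

-- ===== CLAIM (what is proved, stated in full; the proofs are below) =====
def Claim_equal_transform : Prop := ∀ (grid : List (List Int)),
  Dom_transform grid → Pre_transform grid → Spec_transform grid (transform grid)

-- ===== LEMMAS AND PROOFS =====

-- ---------- shared semantic layer (Nat coordinates) ----------
abbrev pvM : Type := Bool × Bool × Bool × Bool

def gH (grid : List (List Int)) : Nat := grid.length
def gW (grid : List (List Int)) : Nat := (grid.headD []).length
def pvCellN (grid : List (List Int)) (i j : Nat) : Int := (grid.getD i []).getD j 1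

def zcN (grid : List (List Int)) (i j : Nat) : Prop :=
  i < gH grid ∧ j < gW grid ∧ pvCellN grid i j = 0

def AdjN (grid : List (List Int)) (c d : Nat × Nat) : Prop :=
  zcN grid c.1 c.2 ∧ zcN grid d.1 d.2 ∧
    ((d.1 + 1 = c.1 ∧ d.2 = c.2) ∨ (d.1 = c.1 + 1 ∧ d.2 = c.2) ∨
     (d.1 = c.1 ∧ d.2 + 1 = c.2) ∨ (d.1 = c.1 ∧ d.2 = c.2 + 1))

def ReachN (grid : List (List Int)) : Nat × Nat → Nat × Nat → Prop :=
  Relation.ReflTransGen (AdjN grid)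

def sidePN (grid : List (List Int)) (k : Nat) (d : Nat × Nat) : Prop :=
  match k with
  | 0 => d.1 = 0
  | 1 => d.1 + 1 = gH grid
  | 2 => d.2 = 0
  | _ => d.2 + 1 = gW grid

def TouchN (grid : List (List Int)) (c : Nat × Nat) (k : Nat) : Prop :=
  ∃ d, ReachN grid c d ∧ sidePN grid k d

noncomputable def pvLb (grid : List (List Int)) (c : Nat × Nat) : pvM :=
  (@decide (TouchN grid c 0) (Classical.propDecidable _),
   @decide (TouchN grid c 1) (Classical.propDecidable _),
   @decide (TouchN grid c 2) (Classical.propDecidable _),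
   @decide (TouchN grid c 3) (Classical.propDecidable _))

-- common reference output both ports are proved equal to
noncomputable def refOut (grid : List (List Int)) : List (List Int) :=
  if grid = [] ∨ grid.headD [] = [] then [] else
    grid.mapIdx (fun i row => row.mapIdx (fun j v =>
      @ite _ (zcN grid i j ∧ pvTouch (pvLb grid (i, j)) ≤ 1) (Classical.propDecidable _) 4 v))

-- ---------- small mask facts ----------
def bitOf (m : pvM) (k : Nat) : Bool :=
  match k with
  | 0 => m.1
  | 1 => m.2.1
  | 2 => m.2.2.1
  | _ => m.2.2.2

def mleB (a b : pvM) : Bool :=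
  (!a.1 || b.1) && (!a.2.1 || b.2.1) && (!a.2.2.1 || b.2.2.1) && (!a.2.2.2 || b.2.2.2)

def pop (m : pvM) : Nat := cond m.1 1 0 + cond m.2.1 1 0 + cond m.2.2.1 1 0 + cond m.2.2.2 1 0

lemma mleB_iff (a b : pvM) :
    mleB a b = true ↔ ∀ k, bitOf a k = true → bitOf b k = true := by
  obtain ⟨a1, a2, a3, a4⟩ := a
  obtain ⟨b1, b2, b3, b4⟩ := b
  simp only [mleB, Bool.and_eq_true, Bool.or_eq_true, Bool.not_eq_eq_eq_not, Bool.not_true]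
  constructor
  · rintro ⟨⟨⟨h1, h2⟩, h3⟩, h4⟩ k
    match k with
    | 0 => simpa [bitOf] using fun h => by simp_all
    | 1 => simpa [bitOf] using fun h => by simp_all
    | 2 => simpa [bitOf] using fun h => by simp_all
    | _ + 3 => simpa [bitOf] using fun h => by simp_all
  · intro h
    refine ⟨⟨⟨?_, ?_⟩, ?_⟩, ?_⟩
    · have := h 0; revert this; cases a1 <;> cases b1 <;> simp [bitOf]
    · have := h 1; revert this; cases a2 <;> cases b2 <;> simp [bitOf]
    · have := h 2; revert this; cases a3 <;> cases b3 <;> simp [bitOf]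
    · have := h 3; revert this; cases a4 <;> cases b4 <;> simp [bitOf]

lemma bitOf_union5 (a b c d e : pvM) (k : Nat) :
    bitOf (pvUnion5 a b c d e) k =
      (bitOf a k || bitOf b k || bitOf c k || bitOf d k || bitOf e k) := by
  match k with
  | 0 => rfl
  | 1 => rfl
  | 2 => rfl
  | _ + 3 => rfl

lemma bitOf_none4 (k : Nat) : bitOf pvNone4 k = false := by
  match k with
  | 0 => rfl
  | 1 => rfl
  | 2 => rfl
  | _ + 3 => rfl

lemma eq_none4_of_bits (m : pvM) (h : ∀ k, bitOf m k = false) : m = pvNone4 := by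
  obtain ⟨a1, a2, a3, a4⟩ := m
  have h0 := h 0; have h1 := h 1; have h2 := h 2; have h3 := h 3
  simp only [bitOf] at h0 h1 h2 h3
  simp [pvNone4, h0, h1, h2, h3]

lemma mask_ext (a b : pvM) (h : ∀ k, bitOf a k = bitOf b k) : a = b := by
  obtain ⟨a1, a2, a3, a4⟩ := a
  obtain ⟨b1, b2, b3, b4⟩ := b
  have h0 := h 0; have h1 := h 1; have h2 := h 2; have h3 := h 3
  simp only [bitOf] at h0 h1 h2 h3
  simp [h0, h1, h2, h3]

lemma mleB_pop (a b : pvM) (h : mleB a b = true) : pop a ≤ pop b := by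
  revert h; revert a b; decide

lemma mleB_pop_eq (a b : pvM) (h : mleB a b = true) (h2 : pop b ≤ pop a) : a = b := by
  revert h h2; revert a b; decide

lemma pop_le_four (a : pvM) : pop a ≤ 4 := by revert a; decide

-- ---------- mask grids ----------
def mAt (m : List (List pvM)) (i j : Nat) : pvM := (m.getD i []).getD j pvNone4

def shapeM (grid : List (List Int)) (m : List (List pvM)) : Prop :=
  m.length = gH grid ∧ ∀ r ∈ m, r.length = gW grid

def soundM (grid : List (List Int)) (m : List (List pvM)) : Prop :=
  ∀ i j k, bitOf (mAt m i j) k = true → zcN grid i j ∧ TouchN grid (i, j) k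

def popRow (r : List pvM) : Nat := (r.map pop).sum
def popG (m : List (List pvM)) : Nat := (m.map popRow).sum
def leR (r s : List pvM) : Prop := List.Forall₂ (fun a b => mleB a b = true) r s
def leG (m n : List (List pvM)) : Prop := List.Forall₂ leR m n

def pvBase (grid : List (List Int)) : List (List pvM) :=
  (PySem.List.pyRange 0 (PySem.List.len grid) 1).map (fun i =>
    (PySem.List.pyRange 0 (PySem.List.len (grid.headD [])) 1).map (fun j =>
      if pvAcell grid i j = 0 then
        (decide (i = 0), decide (i = (PySem.List.len grid) - 1), decide (j = 0),
         decide (j = (PySem.List.len (grid.headD [])) - 1))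
      else pvNone4))

def InvB (grid : List (List Int)) (m : List (List pvM)) : Prop :=
  shapeM grid m ∧ soundM grid m ∧ leG (pvBase grid) m

lemma acell_natCast (grid : List (List Int)) (i j : Nat) :
    pvAcell grid (i : Int) (j : Int) = pvCellN grid i j := by
  simp [pvAcell, pvCellN, PySem.List.pyGetD_natCast]

lemma mget_natCast (m : List (List pvM)) (i j : Nat) :
    pvMget m (i : Int) (j : Int) = mAt m i j := by
  simp [pvMget, mAt, PySem.List.pyGetD_natCast]

lemma mAt_out_row (m : List (List pvM)) (i j : Nat) (h : m.length ≤ i) :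
    mAt m i j = pvNone4 := by
  simp [mAt, List.getD_eq_getElem?_getD, List.getElem?_eq_none h]

lemma mAt_out_col (grid : List (List Int)) (m : List (List pvM)) (i j : Nat)
    (hs : shapeM grid m) (h : gW grid ≤ j) : mAt m i j = pvNone4 := by
  by_cases hi : i < m.length
  · have hr : m.getD i [] ∈ m := by
      rw [List.getD_eq_getElem _ _ hi]; exact List.getElem_mem hi
    have := hs.2 _ hr
    exact List.getD_eq_default _ _ (by omega)
  · simp [mAt, List.getD_eq_getElem?_getD, List.getElem?_eq_none (show m.length ≤ i by omega)]

lemma getDmr {β : Type} (f : Int → β) (n k : Nat) (d : β) (h : k < n) :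
    ((PySem.List.pyRange 0 (n : Int) 1).map f).getD k d = f k := by
  rw [List.getD_eq_getElem?_getD, PySem.List.getElem?_map_pyRange_zero _ _ _ h, Option.getD_some]

lemma shape_step (grid : List (List Int)) (m : List (List pvM)) :
    shapeM grid (pvStep grid (gH grid : Int) (gW grid : Int) m) := by
  constructor
  · simp [pvStep, PySem.List.length_pyRange_one]
  · intro r hr
    simp only [pvStep, List.mem_map] at hr
    obtain ⟨i, _, rfl⟩ := hr
    simp [PySem.List.length_pyRange_one]

lemma step_at (grid : List (List Int)) (m : List (List pvM)) (i j : Nat)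
    (hi : i < gH grid) (hj : j < gW grid) :
    mAt (pvStep grid (gH grid : Int) (gW grid : Int) m) i j =
      if pvCellN grid i j = 0 then
        pvUnion5 (mAt m i j)
          (if 0 < i then mAt m (i - 1) j else pvNone4)
          (if i + 1 < gH grid then mAt m (i + 1) j else pvNone4)
          (if 0 < j then mAt m i (j - 1) else pvNone4)
          (if j + 1 < gW grid then mAt m i (j + 1) else pvNone4)
      else pvNone4 := by
  unfold mAt pvStep
  simp only [getDmr _ _ _ _ hi, getDmr _ _ _ _ hj]
  rw [acell_natCast]
  have c1 : (if (0:Int) < (i:Int) then pvMget m ((i:Int) - 1) (j:Int) else pvNone4) =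
      (if 0 < i then mAt m (i - 1) j else pvNone4) := by
    by_cases h : 0 < i
    · rw [if_pos (by exact_mod_cast h), if_pos h,
        show ((i:Int) - 1) = ((i - 1 : Nat) : Int) by omega, mget_natCast]
    · rw [if_neg (by exact_mod_cast h), if_neg h]
  have c2 : (if (i:Int) + 1 < (gH grid : Int) then pvMget m ((i:Int) + 1) (j:Int) else pvNone4) =
      (if i + 1 < gH grid then mAt m (i + 1) j else pvNone4) := by
    by_cases h : i + 1 < gH grid
    · rw [if_pos (by exact_mod_cast h), if_pos h,
        show ((i:Int) + 1) = ((i + 1 : Nat) : Int) by omega, mget_natCast]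
    · rw [if_neg (by exact_mod_cast h), if_neg h]
  have c3 : (if (0:Int) < (j:Int) then pvMget m (i:Int) ((j:Int) - 1) else pvNone4) =
      (if 0 < j then mAt m i (j - 1) else pvNone4) := by
    by_cases h : 0 < j
    · rw [if_pos (by exact_mod_cast h), if_pos h,
        show ((j:Int) - 1) = ((j - 1 : Nat) : Int) by omega, mget_natCast]
    · rw [if_neg (by exact_mod_cast h), if_neg h]
  have c4 : (if (j:Int) + 1 < (gW grid : Int) then pvMget m (i:Int) ((j:Int) + 1) else pvNone4) =
      (if j + 1 < gW grid then mAt m i (j + 1) else pvNone4) := by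
    by_cases h : j + 1 < gW grid
    · rw [if_pos (by exact_mod_cast h), if_pos h,
        show ((j:Int) + 1) = ((j + 1 : Nat) : Int) by omega, mget_natCast]
    · rw [if_neg (by exact_mod_cast h), if_neg h]
  rw [c1, c2, c3, c4, mget_natCast]
  simp [mAt]

lemma base_at (grid : List (List Int)) (i j : Nat) (hi : i < gH grid) (hj : j < gW grid) :
    mAt (pvBase grid) i j =
      if pvCellN grid i j = 0 then
        (decide (i = 0), decide (i + 1 = gH grid), decide (j = 0), decide (j + 1 = gW grid))
      else pvNone4 := by
  unfold mAt pvBase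
  rw [show PySem.List.len grid = (gH grid : Int) by simp [gH],
      show PySem.List.len (grid.headD []) = (gW grid : Int) by simp [gW]]
  simp only [getDmr _ _ _ _ hi, getDmr _ _ _ _ hj]
  rw [acell_natCast]
  have c1 : (decide ((i:Int) = 0)) = decide (i = 0) := by
    simp
  have c2 : (decide ((i:Int) = (gH grid : Int) - 1)) = decide (i + 1 = gH grid) := by
    rcases eq_or_ne (i + 1) (gH grid) with h | h
    · rw [decide_eq_true (by omega), decide_eq_true h]
    · rw [decide_eq_false (by omega), decide_eq_false h]
  have c3 : (decide ((j:Int) = 0)) = decide (j = 0) := by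
    simp
  have c4 : (decide ((j:Int) = (gW grid : Int) - 1)) = decide (j + 1 = gW grid) := by
    rcases eq_or_ne (j + 1) (gW grid) with h | h
    · rw [decide_eq_true (by omega), decide_eq_true h]
    · rw [decide_eq_false (by omega), decide_eq_false h]
  rw [c1, c2, c3, c4]

lemma shape_base (grid : List (List Int)) : shapeM grid (pvBase grid) := by
  constructor
  · simp [pvBase, PySem.List.length_pyRange_one, gH]
  · intro r hr
    simp only [pvBase, List.mem_map] at hr
    obtain ⟨i, _, rfl⟩ := hr
    simp [PySem.List.length_pyRange_one, gW]

lemma sound_base (grid : List (List Int)) : soundM grid (pvBase grid) := by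
  intro i j k hb
  by_cases hi : i < gH grid
  · by_cases hj : j < gW grid
    · rw [base_at grid i j hi hj] at hb
      by_cases hc : pvCellN grid i j = 0
      · rw [if_pos hc] at hb
        have hz : zcN grid i j := ⟨hi, hj, hc⟩
        refine ⟨hz, ?_⟩
        match k with
        | 0 => exact ⟨(i, j), Relation.ReflTransGen.refl, by simpa [bitOf] using hb⟩
        | 1 => exact ⟨(i, j), Relation.ReflTransGen.refl, by simpa [bitOf] using hb⟩
        | 2 => exact ⟨(i, j), Relation.ReflTransGen.refl, by simpa [bitOf] using hb⟩
        | n + 3 => exact ⟨(i, j), Relation.ReflTransGen.refl, by simpa [bitOf] using hb⟩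
      · rw [if_neg hc, bitOf_none4] at hb; exact absurd hb (by simp)
    · rw [mAt_out_col grid _ i j (shape_base grid) (by omega), bitOf_none4] at hb
      exact absurd hb (by simp)
  · rw [mAt_out_row _ i j (by rw [(shape_base grid).1]; omega), bitOf_none4] at hb
    exact absurd hb (by simp)

lemma touch_of_adj (grid : List (List Int)) (c d : Nat × Nat) (h : AdjN grid c d) (k : Nat)
    (ht : TouchN grid d k) : TouchN grid c k := by
  obtain ⟨e, he, hs⟩ := ht
  exact ⟨e, Relation.ReflTransGen.head h he, hs⟩

lemma mAt_eq_get (m : List (List pvM)) (i j : Nat) (h1 : i < m.length)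
    (h2 : j < (m.get ⟨i, h1⟩).length) : mAt m i j = (m.get ⟨i, h1⟩).get ⟨j, h2⟩ := by
  simp [mAt, List.getD_eq_getElem?_getD, List.getElem?_eq_getElem h1,
    List.getElem?_eq_getElem (show j < m[i].length from h2)]

lemma leG_at (m n : List (List pvM)) (h : leG m n) (i j k : Nat)
    (hb : bitOf (mAt m i j) k = true) : bitOf (mAt n i j) k = true := by
  unfold leG leR at h
  rw [List.forall₂_iff_get] at h
  obtain ⟨hl, hrows⟩ := h
  by_cases hi : i < m.length
  · have hrow := hrows i hi (by omega)
    rw [List.forall₂_iff_get] at hrow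
    obtain ⟨hl2, hent⟩ := hrow
    by_cases hj : j < (m.get ⟨i, hi⟩).length
    · have := hent j hj (by omega)
      rw [mleB_iff] at this
      rw [mAt_eq_get m i j hi hj] at hb
      rw [mAt_eq_get n i j (by omega) (by omega)]
      exact this k hb
    · rw [mAt, List.getD_eq_getElem _ _ hi, List.getD_eq_default _ _ (by simpa using (by omega : (m.get ⟨i, hi⟩).length ≤ j)), bitOf_none4] at hb
      simp at hb
  · rw [mAt_out_row _ i j (by omega), bitOf_none4] at hb
    simp at hb

lemma sound_step (grid : List (List Int)) (m : List (List pvM)) (hm : soundM grid m) :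
    soundM grid (pvStep grid (gH grid : Int) (gW grid : Int) m) := by
  intro i j k hb
  by_cases hi : i < gH grid
  · by_cases hj : j < gW grid
    · rw [step_at grid m i j hi hj] at hb
      by_cases hc : pvCellN grid i j = 0
      · rw [if_pos hc, bitOf_union5] at hb
        have hz : zcN grid i j := ⟨hi, hj, hc⟩
        refine ⟨hz, ?_⟩
        simp only [Bool.or_eq_true] at hb
        rcases hb with ((((h | h) | h) | h) | h)
        · exact (hm i j k h).2
        · by_cases h1 : 0 < i
          · rw [if_pos h1] at h
            obtain ⟨hzd, htd⟩ := hm (i - 1) j k h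
            exact touch_of_adj grid (i, j) (i - 1, j) ⟨hz, hzd, Or.inl ⟨by omega, rfl⟩⟩ k htd
          · rw [if_neg h1, bitOf_none4] at h; simp at h
        · by_cases h1 : i + 1 < gH grid
          · rw [if_pos h1] at h
            obtain ⟨hzd, htd⟩ := hm (i + 1) j k h
            exact touch_of_adj grid (i, j) (i + 1, j) ⟨hz, hzd, Or.inr (Or.inl ⟨rfl, rfl⟩)⟩ k htd
          · rw [if_neg h1, bitOf_none4] at h; simp at h
        · by_cases h1 : 0 < j
          · rw [if_pos h1] at h
            obtain ⟨hzd, htd⟩ := hm i (j - 1) k h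
            exact touch_of_adj grid (i, j) (i, j - 1)
              ⟨hz, hzd, Or.inr (Or.inr (Or.inl ⟨rfl, by omega⟩))⟩ k htd
          · rw [if_neg h1, bitOf_none4] at h; simp at h
        · by_cases h1 : j + 1 < gW grid
          · rw [if_pos h1] at h
            obtain ⟨hzd, htd⟩ := hm i (j + 1) k h
            exact touch_of_adj grid (i, j) (i, j + 1)
              ⟨hz, hzd, Or.inr (Or.inr (Or.inr ⟨rfl, rfl⟩))⟩ k htd
          · rw [if_neg h1, bitOf_none4] at h; simp at h
      · rw [if_neg hc, bitOf_none4] at hb; simp at hb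
    · rw [mAt_out_col grid _ i j (shape_step grid m) (by omega), bitOf_none4] at hb
      simp at hb
  · rw [mAt_out_row _ i j (by rw [(shape_step grid m).1]; omega), bitOf_none4] at hb
    simp at hb

lemma sound_none_at (grid : List (List Int)) (m : List (List pvM)) (hm : soundM grid m)
    (i j : Nat) (h : ¬ zcN grid i j) : mAt m i j = pvNone4 := by
  refine eq_none4_of_bits _ (fun k => ?_)
  by_contra hb
  exact h ((hm i j k (by simpa using hb)).1)

lemma le_step (grid : List (List Int)) (m : List (List pvM))
    (hs : shapeM grid m) (hm : soundM grid m) :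
    leG m (pvStep grid (gH grid : Int) (gW grid : Int) m) := by
  unfold leG leR
  rw [List.forall₂_iff_get]
  have hstep := shape_step grid m
  refine ⟨by rw [hs.1, hstep.1], fun i hi hi2 => ?_⟩
  rw [List.forall₂_iff_get]
  have hrl : (m.get ⟨i, hi⟩).length = gW grid := hs.2 _ (List.get_mem m ⟨i, hi⟩)
  have hrl2 : ((pvStep grid (gH grid : Int) (gW grid : Int) m).get ⟨i, hi2⟩).length = gW grid :=
    hstep.2 _ (List.get_mem _ _)
  refine ⟨by rw [hrl, hrl2], fun j hj hj2 => ?_⟩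
  rw [← mAt_eq_get m i j hi hj, ← mAt_eq_get _ i j hi2 hj2]
  have hiH : i < gH grid := by rw [← hs.1]; omega
  have hjW : j < gW grid := by rw [← hrl]; omega
  rw [step_at grid m i j hiH hjW]
  by_cases hc : pvCellN grid i j = 0
  · rw [if_pos hc, mleB_iff]
    intro k hk
    rw [bitOf_union5]
    simp [hk]
  · rw [if_neg hc, sound_none_at grid m hm i j (fun hz => hc hz.2.2)]
    decide

lemma mleB_refl (a : pvM) : mleB a a = true := by revert a; decide

lemma mleB_trans (a b c : pvM) (h1 : mleB a b = true) (h2 : mleB b c = true) :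
    mleB a c = true := by
  revert h1 h2; revert a b c; decide

lemma leR_trans (a b c : List pvM) (h1 : leR a b) (h2 : leR b c) : leR a c := by
  unfold leR at *
  induction h1 generalizing c with
  | nil => cases h2; exact .nil
  | cons hab _ ih =>
    cases h2 with
    | cons hbc htl => exact .cons (mleB_trans _ _ _ hab hbc) (ih _ htl)

lemma leG_trans (a b c : List (List pvM)) (h1 : leG a b) (h2 : leG b c) : leG a c := by
  unfold leG at *
  induction h1 generalizing c with
  | nil => cases h2; exact .nil
  | cons hab _ ih =>
    cases h2 with
    | cons hbc htl => exact .cons (leR_trans _ _ _ hab hbc) (ih _ htl)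

lemma leR_pop (r s : List pvM) (h : leR r s) : popRow r ≤ popRow s := by
  unfold leR at h
  induction h with
  | nil => simp [popRow]
  | cons hab _ ih =>
    simp only [popRow, List.map_cons, List.sum_cons] at *
    exact Nat.add_le_add (mleB_pop _ _ hab) ih

lemma leG_popG (m n : List (List pvM)) (h : leG m n) : popG m ≤ popG n := by
  unfold leG at h
  induction h with
  | nil => simp [popG]
  | cons hab _ ih =>
    simp only [popG, List.map_cons, List.sum_cons] at *
    exact Nat.add_le_add (leR_pop _ _ hab) ih

lemma leR_pop_eq (r s : List pvM) (h : leR r s) (h2 : popRow s ≤ popRow r) : r = s := by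
  unfold leR at h
  induction h with
  | nil => rfl
  | @cons a b l1 l2 hab htl ih =>
    have h1 := mleB_pop _ _ hab
    have h3 := leR_pop l1 l2 htl
    simp only [popRow, List.map_cons, List.sum_cons] at h2
    unfold popRow at h3
    rw [mleB_pop_eq _ _ hab (by omega), ih (by unfold popRow; omega)]

lemma leG_popG_eq (m n : List (List pvM)) (h : leG m n) (h2 : popG n ≤ popG m) : m = n := by
  unfold leG at h
  induction h with
  | nil => rfl
  | @cons a b l1 l2 hab htl ih =>
    have h1 := leR_pop _ _ hab
    have h3 := leG_popG l1 l2 htl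
    simp only [popG, List.map_cons, List.sum_cons] at h2
    unfold popG at h3
    rw [leR_pop_eq _ _ hab (by omega), ih (by unfold popG; omega)]

lemma popRow_le (grid : List (List Int)) (r : List pvM) (h : r.length = gW grid) :
    popRow r ≤ 4 * gW grid := by
  unfold popRow
  calc (r.map pop).sum ≤ (r.map pop).length * 4 := by
        rw [← smul_eq_mul]
        exact List.sum_le_card_nsmul _ 4 (by
          intro x hx
          simp only [List.mem_map] at hx
          obtain ⟨a, _, rfl⟩ := hx
          exact pop_le_four a)
    _ = 4 * gW grid := by rw [List.length_map, h]; ring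

lemma popG_le (grid : List (List Int)) (m : List (List pvM)) (hs : shapeM grid m) :
    popG m ≤ 4 * (gH grid * gW grid) := by
  unfold popG
  calc (m.map popRow).sum ≤ (m.map popRow).length * (4 * gW grid) := by
        rw [← smul_eq_mul]
        exact List.sum_le_card_nsmul _ _ (by
          intro x hx
          simp only [List.mem_map] at hx
          obtain ⟨r, hr, rfl⟩ := hx
          exact popRow_le grid r (hs.2 r hr))
    _ = 4 * (gH grid * gW grid) := by rw [List.length_map, hs.1]; ring

lemma leG_refl (m : List (List pvM)) : leG m m := by
  unfold leG
  rw [List.forall₂_iff_get]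
  refine ⟨rfl, fun i h1 h2 => ?_⟩
  unfold leR
  rw [List.forall₂_iff_get]
  exact ⟨rfl, fun j hj1 hj2 => mleB_refl _⟩

lemma bloop_spec (grid : List (List Int)) :
    ∀ (fuel : Nat) (m : List (List pvM)), InvB grid m →
      4 * (gH grid * gW grid) ≤ fuel + popG m →
      InvB grid (pvBloop grid (gH grid : Int) (gW grid : Int) fuel m) ∧
        pvStep grid (gH grid : Int) (gW grid : Int)
            (pvBloop grid (gH grid : Int) (gW grid : Int) fuel m) =
          pvBloop grid (gH grid : Int) (gW grid : Int) fuel m := by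
  intro fuel
  induction fuel with
  | zero =>
    intro m hInv hcnt
    obtain ⟨hs, hsound, hbase⟩ := hInv
    have hle := le_step grid m hs hsound
    have h1 := popG_le grid m hs
    have h2 := popG_le grid _ (shape_step grid m)
    have h3 := leG_popG _ _ hle
    have : m = pvStep grid (gH grid : Int) (gW grid : Int) m :=
      leG_popG_eq _ _ hle (by omega)
    exact ⟨⟨hs, hsound, hbase⟩, this.symm⟩
  | succ fuel ih =>
    intro m hInv hcnt
    obtain ⟨hs, hsound, hbase⟩ := hInv
    by_cases hfix : pvStep grid (gH grid : Int) (gW grid : Int) m = m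
    · simp only [pvBloop, hfix]
      exact ⟨⟨hs, hsound, hbase⟩, hfix⟩
    · have hle := le_step grid m hs hsound
      have hstrict : popG m < popG (pvStep grid (gH grid : Int) (gW grid : Int) m) := by
        have h3 := leG_popG _ _ hle
        rcases Nat.lt_or_ge (popG m) (popG (pvStep grid (gH grid : Int) (gW grid : Int) m))
          with h | h
        · exact h
        · exact absurd (leG_popG_eq _ _ hle (by omega)).symm hfix
      have hInv2 : InvB grid (pvStep grid (gH grid : Int) (gW grid : Int) m) :=
        ⟨shape_step grid m, sound_step grid m hsound, leG_trans _ _ _ hbase hle⟩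
      have := ih _ hInv2 (by omega)
      simp only [pvBloop, if_neg hfix]
      exact this

-- the fixpoint's bits are exactly the reachability flags
lemma reach_zc (grid : List (List Int)) (c d : Nat × Nat) (h : ReachN grid c d)
    (hc : zcN grid c.1 c.2) : zcN grid d.1 d.2 := by
  induction h with
  | refl => exact hc
  | tail _ h2 _ => exact h2.2.1

lemma fix_edge (grid : List (List Int)) (m : List (List pvM))
    (hfix : pvStep grid (gH grid : Int) (gW grid : Int) m = m) (k : Nat)
    (a1 a2 b1 b2 : Nat) (hadj : AdjN grid (a1, a2) (b1, b2))
    (hbit : bitOf (mAt m b1 b2) k = true) : bitOf (mAt m a1 a2) k = true := by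
  have hza : zcN grid a1 a2 := hadj.1
  have hzb : zcN grid b1 b2 := hadj.2.1
  rw [← hfix, step_at grid m a1 a2 hza.1 hza.2.1, if_pos hza.2.2, bitOf_union5]
  simp only [Bool.or_eq_true]
  rcases hadj.2.2 with ⟨e1, e2⟩ | ⟨e1, e2⟩ | ⟨e1, e2⟩ | ⟨e1, e2⟩
  · have E1 : b1 + 1 = a1 := e1
    have E2 : b2 = a2 := e2
    refine Or.inl (Or.inl (Or.inl (Or.inr ?_)))
    rw [if_pos (show 0 < a1 by omega), show a1 - 1 = b1 by omega, ← E2]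
    exact hbit
  · have E1 : b1 = a1 + 1 := e1
    have E2 : b2 = a2 := e2
    refine Or.inl (Or.inl (Or.inr ?_))
    rw [if_pos (show a1 + 1 < gH grid by rw [← E1]; exact hzb.1), ← E1, ← E2]
    exact hbit
  · have E1 : b1 = a1 := e1
    have E2 : b2 + 1 = a2 := e2
    refine Or.inl (Or.inr ?_)
    rw [if_pos (show 0 < a2 by omega), show a2 - 1 = b2 by omega, ← E1]
    exact hbit
  · have E1 : b1 = a1 := e1
    have E2 : b2 = a2 + 1 := e2
    refine Or.inr ?_
    rw [if_pos (show a2 + 1 < gW grid by rw [← E2]; exact hzb.2.1), ← E1, ← E2]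
    exact hbit

lemma flow_back (grid : List (List Int)) (m : List (List pvM))
    (hfix : pvStep grid (gH grid : Int) (gW grid : Int) m = m) (k : Nat) :
    ∀ c d : Nat × Nat, ReachN grid c d → bitOf (mAt m d.1 d.2) k = true →
      bitOf (mAt m c.1 c.2) k = true := by
  intro c d h
  induction h with
  | refl => exact id
  | @tail b e _ h2 ih =>
    intro hb
    exact ih (fix_edge grid m hfix k b.1 b.2 e.1 e.2 (by simpa using h2) hb)

lemma fix_char (grid : List (List Int)) (m : List (List pvM)) (hInv : InvB grid m)
    (hfix : pvStep grid (gH grid : Int) (gW grid : Int) m = m)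
    (i j : Nat) (hz : zcN grid i j) (k : Nat) :
    bitOf (mAt m i j) k = true ↔ TouchN grid (i, j) k := by
  obtain ⟨hs, hsound, hbase⟩ := hInv
  constructor
  · intro hb
    exact (hsound i j k hb).2
  · rintro ⟨d, hreach, hside⟩
    have hzd : zcN grid d.1 d.2 := reach_zc grid (i, j) d hreach hz
    have hbd : bitOf (mAt (pvBase grid) d.1 d.2) k = true := by
      rw [base_at grid d.1 d.2 hzd.1 hzd.2.1, if_pos hzd.2.2]
      match k, hside with
      | 0, hside => simpa [bitOf] using hside
      | 1, hside => simpa [bitOf] using hside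
      | 2, hside => simpa [bitOf] using hside
      | n + 3, hside => simpa [bitOf] using hside
    have hmd : bitOf (mAt m d.1 d.2) k = true := leG_at _ _ hbase d.1 d.2 k hbd
    exact flow_back grid m hfix k (i, j) d hreach hmd

lemma mask_char (grid : List (List Int)) (m : List (List pvM)) (hInv : InvB grid m)
    (hfix : pvStep grid (gH grid : Int) (gW grid : Int) m = m)
    (i j : Nat) (hz : zcN grid i j) : mAt m i j = pvLb grid (i, j) := by
  refine mask_ext _ _ (fun k => ?_)
  rw [Bool.eq_iff_iff, fix_char grid m hInv hfix i j hz k]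
  match k with
  | 0 => exact (@decide_eq_true_iff _ (Classical.propDecidable _)).symm
  | 1 => exact (@decide_eq_true_iff _ (Classical.propDecidable _)).symm
  | 2 => exact (@decide_eq_true_iff _ (Classical.propDecidable _)).symm
  | n + 3 => exact (@decide_eq_true_iff _ (Classical.propDecidable _)).symm

lemma alt_char (grid : List (List Int)) : transform_alt grid = refOut grid := by
  by_cases hg : grid = [] ∨ grid.headD [] = []
  · rw [transform_alt, refOut, if_pos hg, if_pos hg]
  · rw [transform_alt, refOut, if_neg hg, if_neg hg]
    show (PySem.List.enumerate grid).map (fun ir =>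
        (PySem.List.enumerate ir.2).map (fun jv =>
          if jv.1 < PySem.List.len (grid.headD []) ∧ pvAcell grid ir.1 jv.1 = 0 ∧
              pvTouch (pvMget (pvBloop grid (PySem.List.len grid)
                  (PySem.List.len (grid.headD []))
                  (4 * (PySem.List.len grid * PySem.List.len (grid.headD []))).toNat
                  (pvBase grid)) ir.1 jv.1) ≤ 1
          then 4 else jv.2)) = _
    rw [show PySem.List.len grid = (gH grid : Int) by simp [gH],
        show PySem.List.len (grid.headD []) = (gW grid : Int) by simp [gW],
        show ((4 : Int) * ((gH grid : Int) * (gW grid : Int))).toNat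
            = 4 * (gH grid * gW grid) by omega]
    obtain ⟨hInvM, hfixM⟩ := bloop_spec grid (4 * (gH grid * gW grid)) (pvBase grid)
      ⟨shape_base grid, sound_base grid, leG_refl _⟩ (Nat.le_add_right _ _)
    set M := pvBloop grid (gH grid : Int) (gW grid : Int) (4 * (gH grid * gW grid)) (pvBase grid)
      with hM
    refine List.ext_getElem (by simp [PySem.List.length_enumerate]) (fun i h1 h2 => ?_)
    have hiH : i < gH grid := by
      simpa [gH, PySem.List.length_enumerate] using h1
    rw [List.getElem_map, PySem.List.getElem_enumerate _ _ i
        (by simpa [PySem.List.length_enumerate] using h1), List.getElem_mapIdx]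
    refine List.ext_getElem (by simp [PySem.List.length_enumerate]) (fun j hj1 hj2 => ?_)
    have hjrow : j < (grid[i]).length := by
      simpa [PySem.List.length_enumerate] using hj1
    rw [List.getElem_map, PySem.List.getElem_enumerate _ _ j
        (by simpa [PySem.List.length_enumerate] using hj1), List.getElem_mapIdx]
    simp only [zero_add, acell_natCast, mget_natCast]
    refine @if_congr _ _ _ _ (Classical.propDecidable _) _ _ _ _ ?_ rfl rfl
    constructor
    · rintro ⟨hjW, hc, ht⟩
      have hjW' : j < gW grid := by exact_mod_cast hjW
      have hz : zcN grid i j := ⟨hiH, hjW', hc⟩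
      exact ⟨hz, by rwa [← mask_char grid M hInvM hfixM i j hz]⟩
    · rintro ⟨hz, ht⟩
      exact ⟨by exact_mod_cast hz.2.1, hz.2.2, by rwa [mask_char grid M hInvM hfixM i j hz]⟩


-- ---------- A-side: bridges and 2-D surgery ----------
def vAt (vis : List (List Bool)) (a b : Nat) : Bool := (vis.getD a []).getD b false

def shapeV (grid : List (List Int)) (vis : List (List Bool)) : Prop :=
  vis.length = gH grid ∧ ∀ r ∈ vis, r.length = gW grid

lemma row_len_of_shapeV (grid : List (List Int)) (vis : List (List Bool))
    (hs : shapeV grid vis) (i : Nat) (hi : i < gH grid) :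
    (vis.getD i []).length = gW grid := by
  have h1 : i < vis.length := by rw [hs.1]; omega
  rw [List.getD_eq_getElem _ _ h1]
  exact hs.2 _ (List.getElem_mem h1)

lemma avis_eq (grid : List (List Int)) (vis : List (List Bool)) (hs : shapeV grid vis)
    (i j : Nat) (hi : i < gH grid) (hj : j < gW grid) :
    pvAvis vis (i : Int) (j : Int) = vAt vis i j := by
  have h1 : i < vis.length := by rw [hs.1]; omega
  have h2 : j < (vis.getD i []).length := by rw [row_len_of_shapeV grid vis hs i hi]; omega
  unfold pvAvis vAt
  rw [PySem.List.pyGetD_natCast, PySem.List.pyGetD_natCast,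
      List.getD_eq_getElem _ _ h2, List.getD_eq_getElem _ _ h2]

lemma set2_natCast {α : Type} (m : List (List α)) (i j : Nat) (v : α) :
    pvSet2 m (i : Int) (j : Int) v = m.set i ((m.getD i []).set j v) := by
  simp [pvSet2, PySem.List.pySetD_natCast, PySem.List.pyGetD_natCast]

def rAt {α : Type} (m : List (List α)) (a b : Nat) (d : α) : α := (m.getD a []).getD b d

lemma getD_set_self {α : Type} (m : List α) (i : Nat) (r d : α) (h : i < m.length) :
    (m.set i r).getD i d = r := by
  rw [List.getD_eq_getElem?_getD, List.getElem?_set, if_pos rfl, if_pos h, Option.getD_some]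

lemma getD_set_other {α : Type} (m : List α) (i a : Nat) (r d : α) (h : a ≠ i) :
    (m.set i r).getD a d = m.getD a d := by
  rw [List.getD_eq_getElem?_getD, List.getElem?_set, if_neg (fun hh => h hh.symm),
    ← List.getD_eq_getElem?_getD]

lemma set2_read_same {α : Type} (m : List (List α)) (i j : Nat) (v d : α)
    (h1 : i < m.length) (h2 : j < (m.getD i []).length) :
    rAt (m.set i ((m.getD i []).set j v)) i j d = v := by
  unfold rAt
  rw [getD_set_self _ _ _ _ h1, getD_set_self _ _ _ _ (by simpa using h2)]

lemma set2_read_other {α : Type} (m : List (List α)) (i j : Nat) (v d : α) (a b : Nat)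
    (h : a ≠ i ∨ b ≠ j) : rAt (m.set i ((m.getD i []).set j v)) a b d = rAt m a b d := by
  unfold rAt
  by_cases hai : a = i
  · subst hai
    rcases h with h | h
    · omega
    · by_cases hl : a < m.length
      · rw [getD_set_self _ _ _ _ hl, getD_set_other _ _ _ _ _ h]
      · rw [List.set_eq_of_length_le (by omega)]
  · rw [getD_set_other _ _ _ _ _ hai]

lemma set2_row_lengths {α : Type} (m : List (List α)) (i j : Nat) (v : α) (a : Nat) :
    ((m.set i ((m.getD i []).set j v)).getD a []).length = (m.getD a []).length := by
  by_cases hai : a = i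
  · subst hai
    by_cases hl : a < m.length
    · rw [getD_set_self _ _ _ _ hl, List.length_set]
    · rw [List.set_eq_of_length_le (by omega)]
  · rw [getD_set_other _ _ _ _ _ hai]

-- ---------- counting visited cells ----------
def countRow (r : List Bool) : Nat := (r.map (fun b => cond b 1 0)).sum
def countV (vis : List (List Bool)) : Nat := (vis.map countRow).sum

lemma sum_map_set {α : Type} (f : α → Nat) :
    ∀ (l : List α) (i : Nat) (r : α), (h : i < l.length) →
      ((l.set i r).map f).sum + f (l[i]) = (l.map f).sum + f r := by
  intro l
  induction l with
  | nil => intro i r h; simp at h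
  | cons x t ih =>
    intro i r h
    match i with
    | 0 => simp [List.set]; omega
    | n + 1 =>
      simp only [List.set, List.map_cons, List.sum_cons, List.getElem_cons_succ]
      have := ih n r (by simpa using h)
      omega

lemma countV_set2 (grid : List (List Int)) (vis : List (List Bool)) (hs : shapeV grid vis)
    (i j : Nat) (hi : i < gH grid) (hj : j < gW grid) (hf : vAt vis i j = false) :
    countV (vis.set i ((vis.getD i []).set j true)) = countV vis + 1 := by
  have h1 : i < vis.length := by rw [hs.1]; omega
  have h2 : j < (vis.getD i []).length := by rw [row_len_of_shapeV grid vis hs i hi]; omega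
  have hrow : countRow ((vis.getD i []).set j true) = countRow (vis.getD i []) + 1 := by
    have := sum_map_set (fun b => cond b 1 0) (vis.getD i []) j true h2
    have hfj : (vis.getD i [])[j] = false := by
      have : vAt vis i j = (vis.getD i [])[j] := by
        unfold vAt; rw [List.getD_eq_getElem _ _ h2]
      rw [← this, hf]
    rw [hfj] at this
    unfold countRow
    simp only [cond_true, cond_false] at this ⊢
    omega
  have := sum_map_set countRow vis i ((vis.getD i []).set j true) h1
  have hgi : vis[i] = vis.getD i [] := by rw [List.getD_eq_getElem _ _ h1]
  rw [hgi, hrow] at this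
  unfold countV
  omega

lemma countRow_le (r : List Bool) : countRow r ≤ r.length := by
  induction r with
  | nil => simp [countRow]
  | cons x t ih =>
    unfold countRow at *
    simp only [List.map_cons, List.sum_cons, List.length_cons]
    cases x <;> simp <;> omega

lemma countV_le (grid : List (List Int)) (vis : List (List Bool)) (hs : shapeV grid vis) :
    countV vis ≤ gH grid * gW grid := by
  unfold countV
  calc (vis.map countRow).sum ≤ (vis.map countRow).length * gW grid := by
        rw [← smul_eq_mul]
        exact List.sum_le_card_nsmul _ _ (by
          intro x hx
          simp only [List.mem_map] at hx
          obtain ⟨r, hr, rfl⟩ := hx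
          calc countRow r ≤ r.length := countRow_le r
            _ = gW grid := hs.2 r hr)
    _ = gH grid * gW grid := by rw [List.length_map, hs.1]

-- ---------- symmetry of adjacency, invariance of the fill flag on components ----------
lemma adj_symm (grid : List (List Int)) (c d : Nat × Nat) (h : AdjN grid c d) :
    AdjN grid d c := by
  obtain ⟨hc, hd, hrel⟩ := h
  refine ⟨hd, hc, ?_⟩
  rcases hrel with ⟨e1, e2⟩ | ⟨e1, e2⟩ | ⟨e1, e2⟩ | ⟨e1, e2⟩
  · exact Or.inr (Or.inl ⟨by omega, by omega⟩)
  · exact Or.inl ⟨by omega, by omega⟩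
  · exact Or.inr (Or.inr (Or.inr ⟨by omega, by omega⟩))
  · exact Or.inr (Or.inr (Or.inl ⟨by omega, by omega⟩))

lemma reach_symm (grid : List (List Int)) (c d : Nat × Nat) (h : ReachN grid c d) :
    ReachN grid d c := by
  induction h with
  | refl => exact Relation.ReflTransGen.refl
  | tail _ h2 ih => exact Relation.ReflTransGen.head (adj_symm grid _ _ h2) ih

lemma touch_congr (grid : List (List Int)) (s a : Nat × Nat) (h : ReachN grid s a) (k : Nat) :
    TouchN grid a k ↔ TouchN grid s k := by
  constructor
  · rintro ⟨d, hr, hside⟩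
    exact ⟨d, Relation.ReflTransGen.trans h hr, hside⟩
  · rintro ⟨d, hr, hside⟩
    exact ⟨d, Relation.ReflTransGen.trans (reach_symm grid s a h) hr, hside⟩

def FillP (grid : List (List Int)) (c : Nat × Nat) : Prop := pvTouch (pvLb grid c) ≤ 1

lemma pvLb_congr (grid : List (List Int)) (s a : Nat × Nat) (h : ReachN grid s a) :
    pvLb grid a = pvLb grid s := by
  refine mask_ext _ _ (fun k => ?_)
  rw [Bool.eq_iff_iff]
  match k with
  | 0 =>
    rw [show bitOf (pvLb grid a) 0 = true ↔ TouchN grid a 0 from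
          @decide_eq_true_iff _ (Classical.propDecidable _),
        show bitOf (pvLb grid s) 0 = true ↔ TouchN grid s 0 from
          @decide_eq_true_iff _ (Classical.propDecidable _)]
    exact touch_congr grid s a h 0
  | 1 =>
    rw [show bitOf (pvLb grid a) 1 = true ↔ TouchN grid a 1 from
          @decide_eq_true_iff _ (Classical.propDecidable _),
        show bitOf (pvLb grid s) 1 = true ↔ TouchN grid s 1 from
          @decide_eq_true_iff _ (Classical.propDecidable _)]
    exact touch_congr grid s a h 1
  | 2 =>
    rw [show bitOf (pvLb grid a) 2 = true ↔ TouchN grid a 2 from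
          @decide_eq_true_iff _ (Classical.propDecidable _),
        show bitOf (pvLb grid s) 2 = true ↔ TouchN grid s 2 from
          @decide_eq_true_iff _ (Classical.propDecidable _)]
    exact touch_congr grid s a h 2
  | n + 3 =>
    rw [show bitOf (pvLb grid a) (n + 3) = true ↔ TouchN grid a 3 from
          @decide_eq_true_iff _ (Classical.propDecidable _),
        show bitOf (pvLb grid s) (n + 3) = true ↔ TouchN grid s 3 from
          @decide_eq_true_iff _ (Classical.propDecidable _)]
    exact touch_congr grid s a h 3

lemma fill_congr (grid : List (List Int)) (s a : Nat × Nat) (h : ReachN grid s a) :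
    FillP grid a ↔ FillP grid s := by
  unfold FillP
  rw [pvLb_congr grid s a h]

-- ---------- the DFS loop invariant ----------
def SInv (grid : List (List Int)) (vis0 : List (List Bool)) (s : Nat × Nat)
    (exL : List (Int × Int)) (vis : List (List Bool)) (comp stack : List (Int × Int)) : Prop :=
  shapeV grid vis ∧
  (∀ c ∈ comp, ∃ a b : Nat, c = ((a : Int), (b : Int)) ∧ zcN grid a b ∧ ReachN grid s (a, b)) ∧
  (∀ c ∈ stack, c ∈ comp) ∧
  (∀ a b : Nat, vAt vis a b = true ↔ (vAt vis0 a b = true ∨ ((a : Int), (b : Int)) ∈ comp)) ∧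
  (∀ a b : Nat, vAt vis0 a b = true → ((a : Int), (b : Int)) ∉ comp) ∧
  (∀ c ∈ comp, c ∉ stack → c ∉ exL →
    ∀ p q : Nat, AdjN grid (c.1.toNat, c.2.toNat) (p, q) → vAt vis p q = true)

lemma vAt_eq_rAt (vis : List (List Bool)) (a b : Nat) : vAt vis a b = rAt vis a b false := rfl

lemma shapeV_set2 (grid : List (List Int)) (vis : List (List Bool)) (hs : shapeV grid vis)
    (i j : Nat) (v : Bool) :
    shapeV grid (vis.set i ((vis.getD i []).set j v)) := by
  constructor
  · rw [List.length_set, hs.1]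
  · intro r hr
    rw [List.mem_iff_getElem] at hr
    obtain ⟨a, ha, rfl⟩ := hr
    have : (vis.set i ((vis.getD i []).set j v))[a] =
        ((vis.set i ((vis.getD i []).set j v)).getD a []) := by
      rw [List.getD_eq_getElem _ _ ha]
    rw [this, set2_row_lengths]
    have ha' : a < vis.length := by simpa using ha
    rw [List.getD_eq_getElem _ _ ha']
    exact hs.2 _ (List.getElem_mem ha')

-- the body of the inner for-loop of dfs (the port's fold function, named for the proofs)
def dfsStepF (grid : List (List Int)) (x y : Int)
    (st : List (List Bool) × List (Int × Int) × List (Int × Int)) (d : Int × Int) :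
    List (List Bool) × List (Int × Int) × List (Int × Int) :=
  let nx := x + d.1
  let ny := y + d.2
  if 0 ≤ nx ∧ nx < (gH grid : Int) ∧ 0 ≤ ny ∧ ny < (gW grid : Int) ∧
      ¬ pvAvis st.1 nx ny = true ∧ pvAcell grid nx ny = 0 then
    (pvSet2 st.1 nx ny true, st.2.1 ++ [(nx, ny)], (nx, ny) :: st.2.2)
  else st

-- one direction step of the inner for-loop of dfs
lemma dir_step (grid : List (List Int)) (vis0 : List (List Bool)) (s : Nat × Nat)
    (x y : Int) (a0 b0 : Nat) (hx : x = (a0 : Int)) (hy : y = (b0 : Int))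
    (hz0 : zcN grid a0 b0) (hr0 : ReachN grid s (a0, b0))
    (d : Int × Int) (hd : d ∈ pvDirs)
    (st : List (List Bool) × List (Int × Int) × List (Int × Int))
    (hI : SInv grid vis0 s [(x, y)] st.1 st.2.1 st.2.2) :
    let st' := dfsStepF grid x y st d
    SInv grid vis0 s [(x, y)] st'.1 st'.2.1 st'.2.2 ∧
    (∃ p : Nat, countV st'.1 = countV st.1 + p ∧ st'.2.2.length = st.2.2.length + p) ∧
    (∀ a b : Nat, vAt st.1 a b = true → vAt st'.1 a b = true) ∧
    (∀ c ∈ st.2.1, c ∈ st'.2.1) ∧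
    (∀ p q : Nat, x + d.1 = (p : Int) → y + d.2 = (q : Int) →
      AdjN grid (a0, b0) (p, q) → vAt st'.1 p q = true) := by
  obtain ⟨hsh, hcomp, hstk, hiff, hdisj, hclo⟩ := hI
  dsimp only [dfsStepF]
  by_cases hg : 0 ≤ x + d.1 ∧ x + d.1 < (gH grid : Int) ∧ 0 ≤ y + d.2 ∧
      y + d.2 < (gW grid : Int) ∧ ¬ pvAvis st.1 (x + d.1) (y + d.2) = true ∧
      pvAcell grid (x + d.1) (y + d.2) = 0
  · obtain ⟨hg1, hg2, hg3, hg4, hg5, hg6⟩ := hg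
    -- the neighbour is a fresh zero cell (a1, b1)
    set a1 := (x + d.1).toNat with ha1
    set b1 := (y + d.2).toNat with hb1
    have ea : x + d.1 = (a1 : Int) := by omega
    have eb : y + d.2 = (b1 : Int) := by omega
    have ha1H : a1 < gH grid := by omega
    have hb1W : b1 < gW grid := by omega
    have hz1 : zcN grid a1 b1 := ⟨ha1H, hb1W, by rw [← acell_natCast, ← ea, ← eb]; exact hg6⟩
    have hadj : AdjN grid (a0, b0) (a1, b1) := by
      refine ⟨hz0, hz1, ?_⟩
      simp only [pvDirs, List.mem_cons, List.not_mem_nil, or_false] at hd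
      rcases hd with rfl | rfl | rfl | rfl
      · have ea' : x + -1 = (a1 : Int) := ea
        have eb' : y + 0 = (b1 : Int) := eb
        exact Or.inl ⟨show a1 + 1 = a0 by omega, show b1 = b0 by omega⟩
      · have ea' : x + 1 = (a1 : Int) := ea
        have eb' : y + 0 = (b1 : Int) := eb
        exact Or.inr (Or.inl ⟨show a1 = a0 + 1 by omega, show b1 = b0 by omega⟩)
      · have ea' : x + 0 = (a1 : Int) := ea
        have eb' : y + -1 = (b1 : Int) := eb
        exact Or.inr (Or.inr (Or.inl ⟨show a1 = a0 by omega, show b1 + 1 = b0 by omega⟩))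
      · have ea' : x + 0 = (a1 : Int) := ea
        have eb' : y + 1 = (b1 : Int) := eb
        exact Or.inr (Or.inr (Or.inr ⟨show a1 = a0 by omega, show b1 = b0 + 1 by omega⟩))
    have hfresh : vAt st.1 a1 b1 = false := by
      have := avis_eq grid st.1 hsh a1 b1 ha1H hb1W
      rw [← ea, ← eb] at this
      rw [← this]
      simpa using hg5
    have hnotc : ((a1 : Int), (b1 : Int)) ∉ st.2.1 := by
      intro hmem
      have := (hiff a1 b1).2 (Or.inr hmem)
      rw [hfresh] at this; exact absurd this (by simp)
    have h1 : a1 < st.1.length := by rw [hsh.1]; omega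
    have h2 : b1 < (st.1.getD a1 []).length := by
      rw [row_len_of_shapeV grid st.1 hsh a1 ha1H]; omega
    rw [if_pos ⟨hg1, hg2, hg3, hg4, hg5, hg6⟩]
    rw [ea, eb, set2_natCast]
    refine ⟨⟨shapeV_set2 grid st.1 hsh a1 b1 true, ?_, ?_, ?_, ?_, ?_⟩, ?_, ?_, ?_, ?_⟩
    · intro c hc
      rw [List.mem_append, List.mem_singleton] at hc
      rcases hc with hc | rfl
      · exact hcomp c hc
      · exact ⟨a1, b1, rfl, hz1, Relation.ReflTransGen.tail hr0 hadj⟩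
    · intro c hc
      rw [List.mem_cons] at hc
      rcases hc with rfl | hc
      · simp
      · rw [List.mem_append]; exact Or.inl (hstk c hc)
    · intro a b
      rw [vAt_eq_rAt]
      by_cases he : a = a1 ∧ b = b1
      · obtain ⟨rfl, rfl⟩ := he
        rw [set2_read_same _ _ _ _ _ h1 h2]
        simp
      · rw [set2_read_other _ _ _ _ _ _ _ (by tauto), ← vAt_eq_rAt, hiff a b]
        constructor
        · rintro (h | h)
          · exact Or.inl h
          · exact Or.inr (by rw [List.mem_append]; exact Or.inl h)
        · rintro (h | h)
          · exact Or.inl h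
          · rw [List.mem_append, List.mem_singleton] at h
            rcases h with h | h
            · exact Or.inr h
            · exfalso
              apply he
              have e1 : (a : Int) = (a1 : Int) := congrArg Prod.fst h
              have e2 : (b : Int) = (b1 : Int) := congrArg Prod.snd h
              omega
    · intro a b hv
      rw [List.mem_append, List.mem_singleton]
      rintro (h | h)
      · exact hdisj a b hv h
      · have e1 : a = a1 := by
          have := congrArg Prod.fst h; simpa using this
        have e2 : b = b1 := by
          have := congrArg Prod.snd h; simpa using this
        rw [e1, e2] at hv
        have := (hiff a1 b1).2 (Or.inl hv)
        rw [hfresh] at this; exact absurd this (by simp)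
    · intro c hc hcs hcex p q hadj'
      rw [List.mem_append, List.mem_singleton] at hc
      have hc' : c ∈ st.2.1 := by
        rcases hc with hc | rfl
        · exact hc
        · exfalso; exact hcs (by simp)
      have hcs' : c ∉ st.2.2 := fun hh => hcs (by rw [List.mem_cons]; exact Or.inr hh)
      have := hclo c hc' hcs' hcex p q hadj'
      rw [vAt_eq_rAt]
      by_cases he : p = a1 ∧ q = b1
      · obtain ⟨rfl, rfl⟩ := he
        rw [set2_read_same _ _ _ _ _ h1 h2]
      · rw [set2_read_other _ _ _ _ _ _ _ (by tauto), ← vAt_eq_rAt]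
        exact this
    · refine ⟨1, ?_, by simp⟩
      rw [countV_set2 grid st.1 hsh a1 b1 ha1H hb1W hfresh]
    · intro a b hv
      rw [vAt_eq_rAt]
      by_cases he : a = a1 ∧ b = b1
      · obtain ⟨rfl, rfl⟩ := he
        rw [set2_read_same _ _ _ _ _ h1 h2]
      · rw [set2_read_other _ _ _ _ _ _ _ (by tauto), ← vAt_eq_rAt]
        exact hv
    · intro c hc
      rw [List.mem_append]; exact Or.inl hc
    · intro p q hp hq hadj'
      have e1 : p = a1 := by omega
      have e2 : q = b1 := by omega
      subst e1; subst e2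
      rw [vAt_eq_rAt, set2_read_same _ _ _ _ _ h1 h2]
  · rw [if_neg hg]
    refine ⟨⟨hsh, hcomp, hstk, hiff, hdisj, hclo⟩, ⟨0, by omega, by omega⟩,
      fun a b hv => hv, fun c hc => hc, ?_⟩
    -- the guard failed: the neighbour is already visited or is not a zero cell
    intro p q hp hq hadj'
    have hzp : zcN grid p q := hadj'.2.1
    have hg1 : (0 : Int) ≤ x + d.1 := by omega
    have hg2 : x + d.1 < (gH grid : Int) := by
      have := hzp.1; omega
    have hg3 : (0 : Int) ≤ y + d.2 := by omega
    have hg4 : y + d.2 < (gW grid : Int) := by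
      have := hzp.2.1; omega
    have hg6 : pvAcell grid (x + d.1) (y + d.2) = 0 := by
      rw [hp, hq, acell_natCast]; exact hzp.2.2
    have hg5 : ¬ ¬ pvAvis st.1 (x + d.1) (y + d.2) = true := by
      intro hne
      exact hg ⟨hg1, hg2, hg3, hg4, hne, hg6⟩
    have : pvAvis st.1 (x + d.1) (y + d.2) = true := by
      by_contra hne; exact hg5 hne
    rw [hp, hq, avis_eq grid st.1 hsh p q hzp.1 hzp.2.1] at this
    exact this

lemma dirs_fold (grid : List (List Int)) (vis0 : List (List Bool)) (s : Nat × Nat)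
    (x y : Int) (a0 b0 : Nat) (hx : x = (a0 : Int)) (hy : y = (b0 : Int))
    (hz0 : zcN grid a0 b0) (hr0 : ReachN grid s (a0, b0)) :
    ∀ (dirs : List (Int × Int)), (∀ d ∈ dirs, d ∈ pvDirs) →
    ∀ (st : List (List Bool) × List (Int × Int) × List (Int × Int)),
      SInv grid vis0 s [(x, y)] st.1 st.2.1 st.2.2 →
      (SInv grid vis0 s [(x, y)]
          (dirs.foldl (dfsStepF grid x y) st).1
          (dirs.foldl (dfsStepF grid x y) st).2.1 (dirs.foldl (dfsStepF grid x y) st).2.2) ∧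
      (∃ p : Nat, countV (dirs.foldl (dfsStepF grid x y) st).1 = countV st.1 + p ∧
        (dirs.foldl (dfsStepF grid x y) st).2.2.length = st.2.2.length + p) ∧
      (∀ a b : Nat, vAt st.1 a b = true → vAt (dirs.foldl (dfsStepF grid x y) st).1 a b = true) ∧
      (∀ c ∈ st.2.1, c ∈ (dirs.foldl (dfsStepF grid x y) st).2.1) ∧
      (∀ d ∈ dirs, ∀ p q : Nat, x + d.1 = (p : Int) → y + d.2 = (q : Int) →
        AdjN grid (a0, b0) (p, q) → vAt (dirs.foldl (dfsStepF grid x y) st).1 p q = true) := by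
  intro dirs
  induction dirs with
  | nil =>
    intro _ st hI
    simp only [List.foldl_nil]
    exact ⟨hI, ⟨0, by omega, by omega⟩, fun a b h => h, fun c hc => hc, by simp⟩
  | cons d ds ih =>
    intro hdirs st hI
    rw [List.foldl_cons]
    obtain ⟨hI1, ⟨p1, hc1, hl1⟩, hm1, hcm1, hh1⟩ :=
      dir_step grid vis0 s x y a0 b0 hx hy hz0 hr0 d (hdirs d (by simp)) st hI
    obtain ⟨hI2, ⟨p2, hc2, hl2⟩, hm2, hcm2, hh2⟩ :=
      ih (fun e he => hdirs e (by simp [he])) _ hI1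
    refine ⟨hI2, ⟨p1 + p2, by omega, by omega⟩,
      fun a b h => hm2 a b (hm1 a b h), fun c hc => hcm2 c (hcm1 c hc), ?_⟩
    intro e he p q hp hq hadj
    rcases List.mem_cons.1 he with rfl | he
    · exact hm2 p q (hh1 p q hp hq hadj)
    · exact hh2 e he p q hp hq hadj

lemma dfsLoop_spec (grid : List (List Int)) (vis0 : List (List Bool)) (s : Nat × Nat) :
    ∀ (fuel : Nat) (vis : List (List Bool)) (comp stack : List (Int × Int)),
      SInv grid vis0 s [] vis comp stack →
      2 * (gH grid * gW grid - countV vis) + stack.length ≤ fuel →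
      SInv grid vis0 s []
          (pvDfsLoop grid (gH grid : Int) (gW grid : Int) fuel vis comp stack).1
          (pvDfsLoop grid (gH grid : Int) (gW grid : Int) fuel vis comp stack).2 [] ∧
        (∀ c ∈ comp, c ∈ (pvDfsLoop grid (gH grid : Int) (gW grid : Int) fuel vis comp stack).2) := by
  intro fuel
  induction fuel with
  | zero =>
    intro vis comp stack hI hμ
    have hstk : stack = [] := by
      have : stack.length = 0 := by omega
      exact List.length_eq_zero_iff.1 this
    subst hstk
    exact ⟨hI, fun c hc => hc⟩
  | succ fuel ih =>
    intro vis comp stack hI hμ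
    match stack with
    | [] => exact ⟨hI, fun c hc => hc⟩
    | (x, y) :: rest =>
      obtain ⟨a0, b0, heq, hz0, hr0⟩ := hI.2.1 (x, y) (hI.2.2.1 (x, y) (by simp))
      have hx : x = (a0 : Int) := congrArg Prod.fst heq
      have hy : y = (b0 : Int) := congrArg Prod.snd heq
      have hIrest : SInv grid vis0 s [(x, y)] vis comp rest := by
        obtain ⟨h1, h2, h3, h4, h5, h6⟩ := hI
        refine ⟨h1, h2, fun c hc => h3 c (by simp [hc]), h4, h5, ?_⟩
        intro c hc hcs hcex p q hadj
        refine h6 c hc ?_ (List.not_mem_nil) p q hadj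
        intro hmem
        rcases List.mem_cons.1 hmem with rfl | hmem
        · exact hcex (by simp)
        · exact hcs hmem
      obtain ⟨hI', ⟨p, hcV, hlen⟩, hmono, hcmono, hhandled⟩ :=
        dirs_fold grid vis0 s x y a0 b0 hx hy hz0 hr0 pvDirs (fun d hd => hd) (vis, comp, rest)
          hIrest
      dsimp only at hcV hlen hmono hcmono
      set st' := pvDirs.foldl (dfsStepF grid x y) (vis, comp, rest) with hst'
      have hIfull : SInv grid vis0 s [] st'.1 st'.2.1 st'.2.2 := by
        obtain ⟨h1, h2, h3, h4, h5, h6⟩ := hI'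
        refine ⟨h1, h2, h3, h4, h5, ?_⟩
        intro c hc hcs _ p q hadj
        by_cases hcx : c = (x, y)
        · subst hcx
          rw [show (((x, y).1.toNat : Nat), ((x, y).2.toNat : Nat)) = (a0, b0) by
            rw [show (x, y).1 = x from rfl, show (x, y).2 = y from rfl, hx, hy]; simp] at hadj
          rcases hadj.2.2 with ⟨e1, e2⟩ | ⟨e1, e2⟩ | ⟨e1, e2⟩ | ⟨e1, e2⟩
          · have E1 : p + 1 = a0 := e1
            have E2 : q = b0 := e2
            exact hhandled (-1, 0) (by simp [pvDirs]) p q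
              (show x + -1 = (p : Int) by omega) (show y + 0 = (q : Int) by omega) hadj
          · have E1 : p = a0 + 1 := e1
            have E2 : q = b0 := e2
            exact hhandled (1, 0) (by simp [pvDirs]) p q
              (show x + 1 = (p : Int) by omega) (show y + 0 = (q : Int) by omega) hadj
          · have E1 : p = a0 := e1
            have E2 : q + 1 = b0 := e2
            exact hhandled (0, -1) (by simp [pvDirs]) p q
              (show x + 0 = (p : Int) by omega) (show y + -1 = (q : Int) by omega) hadj
          · have E1 : p = a0 := e1
            have E2 : q = b0 + 1 := e2
            exact hhandled (0, 1) (by simp [pvDirs]) p q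
              (show x + 0 = (p : Int) by omega) (show y + 1 = (q : Int) by omega) hadj
        · exact h6 c hc hcs (by simp [hcx]) p q hadj
      have hred : pvDfsLoop grid (gH grid : Int) (gW grid : Int) (fuel + 1) vis comp
          ((x, y) :: rest) =
          pvDfsLoop grid (gH grid : Int) (gW grid : Int) fuel st'.1 st'.2.1 st'.2.2 := rfl
      rw [hred]
      have hshape' : shapeV grid st'.1 := hIfull.1
      have hcle : countV st'.1 ≤ gH grid * gW grid := countV_le grid st'.1 hshape'
      have hμ' : 2 * (gH grid * gW grid - countV st'.1) + st'.2.2.length ≤ fuel := by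
        have : ((x, y) :: rest).length = rest.length + 1 := by simp
        omega
      obtain ⟨hfin, hcompfin⟩ := ih st'.1 st'.2.1 st'.2.2 hIfull hμ'
      exact ⟨hfin, fun c hc => hcompfin c (hcmono c hc)⟩

lemma dfs_spec (grid : List (List Int)) (vis0 : List (List Bool)) (i j : Nat)
    (hz : zcN grid i j) (hs0 : shapeV grid vis0) (hfresh : vAt vis0 i j = false) :
    SInv grid vis0 (i, j) []
        (pvDfs grid (gH grid : Int) (gW grid : Int) (i : Int) (j : Int) vis0).1
        (pvDfs grid (gH grid : Int) (gW grid : Int) (i : Int) (j : Int) vis0).2 [] ∧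
      ((i : Int), (j : Int)) ∈
        (pvDfs grid (gH grid : Int) (gW grid : Int) (i : Int) (j : Int) vis0).2 := by
  have h1 : i < vis0.length := by rw [hs0.1]; exact hz.1
  have h2 : j < (vis0.getD i []).length := by
    rw [row_len_of_shapeV grid vis0 hs0 i hz.1]; exact hz.2.1
  have hvis1 : pvSet2 vis0 (i : Int) (j : Int) true =
      vis0.set i ((vis0.getD i []).set j true) := set2_natCast vis0 i j true
  have hsh1 : shapeV grid (vis0.set i ((vis0.getD i []).set j true)) :=
    shapeV_set2 grid vis0 hs0 i j true
  have hI : SInv grid vis0 (i, j) [] (vis0.set i ((vis0.getD i []).set j true))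
      [((i : Int), (j : Int))] [((i : Int), (j : Int))] := by
    refine ⟨hsh1, ?_, fun c hc => hc, ?_, ?_, ?_⟩
    · intro c hc
      rw [List.mem_singleton] at hc
      subst hc
      exact ⟨i, j, rfl, hz, Relation.ReflTransGen.refl⟩
    · intro a b
      rw [vAt_eq_rAt]
      by_cases he : a = i ∧ b = j
      · obtain ⟨rfl, rfl⟩ := he
        rw [set2_read_same _ _ _ _ _ h1 h2]
        simp
      · rw [set2_read_other _ _ _ _ _ _ _ (by tauto), ← vAt_eq_rAt]
        constructor
        · exact fun h => Or.inl h
        · rintro (h | h)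
          · exact h
          · exfalso
            rw [List.mem_singleton] at h
            have e1 : (a : Int) = (i : Int) := congrArg Prod.fst h
            have e2 : (b : Int) = (j : Int) := congrArg Prod.snd h
            exact he ⟨by omega, by omega⟩
    · intro a b hv hmem
      rw [List.mem_singleton] at hmem
      have e1 : a = i := by have := congrArg Prod.fst hmem; simpa using this
      have e2 : b = j := by have := congrArg Prod.snd hmem; simpa using this
      subst e1; subst e2
      rw [hfresh] at hv; exact absurd hv (by simp)
    · intro c hc hcs _
      exact absurd hc (by simpa using hcs)
  have hcnt : countV (vis0.set i ((vis0.getD i []).set j true)) = countV vis0 + 1 :=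
    countV_set2 grid vis0 hs0 i j hz.1 hz.2.1 hfresh
  have hcle : countV (vis0.set i ((vis0.getD i []).set j true)) ≤ gH grid * gW grid :=
    countV_le grid _ hsh1
  have hfuel : (2 * ((gH grid : Int) * (gW grid : Int)).toNat + 1) =
      2 * (gH grid * gW grid) + 1 := by
    rw [show ((gH grid : Int) * (gW grid : Int)).toNat = gH grid * gW grid by
      rw [← Nat.cast_mul, Int.toNat_natCast]]
  unfold pvDfs
  rw [hvis1, hfuel]
  obtain ⟨ha, hb⟩ := dfsLoop_spec grid vis0 (i, j) (2 * (gH grid * gW grid) + 1) _ _ _ hI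
    (by simp only [List.length_cons, List.length_nil]; omega)
  exact ⟨ha, hb _ (by simp)⟩

-- membership in the final component list is exactly reachability from the start cell
lemma comp_char (grid : List (List Int)) (vis0 : List (List Bool)) (i j : Nat)
    (hz : zcN grid i j) (hs0 : shapeV grid vis0) (hfresh : vAt vis0 i j = false)
    (hclosed0 : ∀ a b : Nat, vAt vis0 a b = true →
      ∀ p q : Nat, AdjN grid (a, b) (p, q) → vAt vis0 p q = true) (p q : Nat) :
    ((p : Int), (q : Int)) ∈
        (pvDfs grid (gH grid : Int) (gW grid : Int) (i : Int) (j : Int) vis0).2 ↔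
      ReachN grid (i, j) (p, q) := by
  obtain ⟨⟨hsh, hcomp, _, hiff, hdisj, hclo⟩, hstart⟩ :=
    dfs_spec grid vis0 i j hz hs0 hfresh
  constructor
  · intro hmem
    obtain ⟨a, b, heq, _, hr⟩ := hcomp _ hmem
    have e1 : p = a := by have := congrArg Prod.fst heq; simpa using this
    have e2 : q = b := by have := congrArg Prod.snd heq; simpa using this
    subst e1; subst e2
    exact hr
  · intro hr
    have main : ∀ e : Nat × Nat, ReachN grid (i, j) e → ((e.1 : Int), (e.2 : Int)) ∈
        (pvDfs grid (gH grid : Int) (gW grid : Int) (i : Int) (j : Int) vis0).2 := by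
      intro e he
      induction he with
      | refl => exact hstart
      | @tail b d hr1 hadj ih =>
        have hb : ((b.1 : Int), (b.2 : Int)) ∈
            (pvDfs grid (gH grid : Int) (gW grid : Int) (i : Int) (j : Int) vis0).2 := ih
        have hvd : vAt (pvDfs grid (gH grid : Int) (gW grid : Int) (i : Int) (j : Int) vis0).1
            d.1 d.2 = true := by
          have := hclo _ hb (List.not_mem_nil) (List.not_mem_nil) d.1 d.2
          apply this
          simpa using hadj
        rcases (hiff d.1 d.2).1 hvd with hv0 | hmem
        · exfalso
          have hvb : vAt vis0 b.1 b.2 = true :=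
            hclosed0 d.1 d.2 hv0 b.1 b.2 (adj_symm grid _ _ (by simpa using hadj))
          exact hdisj b.1 b.2 hvb hb
        · simpa using hmem
    exact main (p, q) hr
-- ---------- the borders set ----------
def bordF (grid : List (List Int)) (b : PySem.Set String) (c : Int × Int) : PySem.Set String :=
  let b := if c.1 = 0 then PySem.Set.add b "top" else b
  let b := if c.1 = (PySem.List.len grid) - 1 then PySem.Set.add b "bottom" else b
  let b := if c.2 = 0 then PySem.Set.add b "left" else b
  if c.2 = (PySem.List.len (grid.headD [])) - 1 then PySem.Set.add b "right" else b

lemma bordF_mem (grid : List (List Int)) (b : PySem.Set String) (c : Int × Int) (x : String) :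
    x ∈ bordF grid b c ↔ x ∈ b ∨ (x = "top" ∧ c.1 = 0) ∨
      (x = "bottom" ∧ c.1 = (gH grid : Int) - 1) ∨ (x = "left" ∧ c.2 = 0) ∨
      (x = "right" ∧ c.2 = (gW grid : Int) - 1) := by
  unfold bordF
  rw [show PySem.List.len grid = (gH grid : Int) by simp [gH],
      show PySem.List.len (grid.headD []) = (gW grid : Int) by simp [gW]]
  split_ifs <;> simp_all [PySem.Set.mem_add] <;> tauto

lemma bordF_nodup (grid : List (List Int)) (b : PySem.Set String) (c : Int × Int)
    (hn : b.Nodup) : (bordF grid b c).Nodup := by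
  unfold bordF
  split_ifs <;>
    first
      | exact hn
      | exact PySem.Set.nodup_add _ _ hn
      | exact PySem.Set.nodup_add _ _ (PySem.Set.nodup_add _ _ hn)
      | exact PySem.Set.nodup_add _ _ (PySem.Set.nodup_add _ _ (PySem.Set.nodup_add _ _ hn))
      | exact PySem.Set.nodup_add _ _
          (PySem.Set.nodup_add _ _ (PySem.Set.nodup_add _ _ (PySem.Set.nodup_add _ _ hn)))

lemma bord_fold_mem (grid : List (List Int)) :
    ∀ (l : List (Int × Int)) (b0 : PySem.Set String) (x : String),
      x ∈ l.foldl (bordF grid) b0 ↔ x ∈ b0 ∨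
        (x = "top" ∧ ∃ c ∈ l, c.1 = 0) ∨
        (x = "bottom" ∧ ∃ c ∈ l, c.1 = (gH grid : Int) - 1) ∨
        (x = "left" ∧ ∃ c ∈ l, c.2 = 0) ∨
        (x = "right" ∧ ∃ c ∈ l, c.2 = (gW grid : Int) - 1) := by
  intro l
  induction l with
  | nil => intro b0 x; simp
  | cons c t ih =>
    intro b0 x
    rw [List.foldl_cons, ih, bordF_mem]
    simp only [List.mem_cons]
    constructor
    · rintro ((h | h | h | h | h) | h | h | h | h)
      · exact Or.inl h
      · exact Or.inr (Or.inl ⟨h.1, c, Or.inl rfl, h.2⟩)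
      · exact Or.inr (Or.inr (Or.inl ⟨h.1, c, Or.inl rfl, h.2⟩))
      · exact Or.inr (Or.inr (Or.inr (Or.inl ⟨h.1, c, Or.inl rfl, h.2⟩)))
      · exact Or.inr (Or.inr (Or.inr (Or.inr ⟨h.1, c, Or.inl rfl, h.2⟩)))
      · obtain ⟨hx, d, hd, hP⟩ := h
        exact Or.inr (Or.inl ⟨hx, d, Or.inr hd, hP⟩)
      · obtain ⟨hx, d, hd, hP⟩ := h
        exact Or.inr (Or.inr (Or.inl ⟨hx, d, Or.inr hd, hP⟩))
      · obtain ⟨hx, d, hd, hP⟩ := h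
        exact Or.inr (Or.inr (Or.inr (Or.inl ⟨hx, d, Or.inr hd, hP⟩)))
      · obtain ⟨hx, d, hd, hP⟩ := h
        exact Or.inr (Or.inr (Or.inr (Or.inr ⟨hx, d, Or.inr hd, hP⟩)))
    · rintro (h | ⟨hx, d, (rfl | hd), hP⟩ | ⟨hx, d, (rfl | hd), hP⟩ |
        ⟨hx, d, (rfl | hd), hP⟩ | ⟨hx, d, (rfl | hd), hP⟩)
      · exact Or.inl (Or.inl h)
      · exact Or.inl (Or.inr (Or.inl ⟨hx, hP⟩))
      · exact Or.inr (Or.inl ⟨hx, d, hd, hP⟩)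
      · exact Or.inl (Or.inr (Or.inr (Or.inl ⟨hx, hP⟩)))
      · exact Or.inr (Or.inr (Or.inl ⟨hx, d, hd, hP⟩))
      · exact Or.inl (Or.inr (Or.inr (Or.inr (Or.inl ⟨hx, hP⟩))))
      · exact Or.inr (Or.inr (Or.inr (Or.inl ⟨hx, d, hd, hP⟩)))
      · exact Or.inl (Or.inr (Or.inr (Or.inr (Or.inr ⟨hx, hP⟩))))
      · exact Or.inr (Or.inr (Or.inr (Or.inr ⟨hx, d, hd, hP⟩)))

lemma bord_fold_nodup (grid : List (List Int)) :
    ∀ (l : List (Int × Int)) (b0 : PySem.Set String), b0.Nodup →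
      (l.foldl (bordF grid) b0).Nodup := by
  intro l
  induction l with
  | nil => intro b0 h; simpa using h
  | cons c t ih =>
    intro b0 h
    rw [List.foldl_cons]
    exact ih _ (bordF_nodup grid b0 c h)

lemma nodup_four_length (l : List String) (hn : l.Nodup) (P0 P1 P2 P3 : Prop)
    (h : ∀ x, x ∈ l ↔ (x = "top" ∧ P0) ∨ (x = "bottom" ∧ P1) ∨ (x = "left" ∧ P2) ∨
      (x = "right" ∧ P3)) :
    (l.length : Int) = @ite _ P0 (Classical.propDecidable _) 1 0 +
      @ite _ P1 (Classical.propDecidable _) 1 0 +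
      @ite _ P2 (Classical.propDecidable _) 1 0 +
      @ite _ P3 (Classical.propDecidable _) 1 0 := by
  by_cases hp0 : P0 <;> by_cases hp1 : P1 <;> by_cases hp2 : P2 <;> by_cases hp3 : P3
  · have hp : l.Perm (["top", "bottom", "left", "right"]) := (List.perm_ext_iff_of_nodup hn (by decide)).2
      (fun a => by rw [h a]; simp [hp0, hp1, hp2, hp3])
    rw [hp.length_eq]
    simp [hp0, hp1, hp2, hp3]
  · have hp : l.Perm (["top", "bottom", "left"]) := (List.perm_ext_iff_of_nodup hn (by decide)).2
      (fun a => by rw [h a]; simp [hp0, hp1, hp2, hp3])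
    rw [hp.length_eq]
    simp [hp0, hp1, hp2, hp3]
  · have hp : l.Perm (["top", "bottom", "right"]) := (List.perm_ext_iff_of_nodup hn (by decide)).2
      (fun a => by rw [h a]; simp [hp0, hp1, hp2, hp3])
    rw [hp.length_eq]
    simp [hp0, hp1, hp2, hp3]
  · have hp : l.Perm (["top", "bottom"]) := (List.perm_ext_iff_of_nodup hn (by decide)).2
      (fun a => by rw [h a]; simp [hp0, hp1, hp2, hp3])
    rw [hp.length_eq]
    simp [hp0, hp1, hp2, hp3]
  · have hp : l.Perm (["top", "left", "right"]) := (List.perm_ext_iff_of_nodup hn (by decide)).2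
      (fun a => by rw [h a]; simp [hp0, hp1, hp2, hp3])
    rw [hp.length_eq]
    simp [hp0, hp1, hp2, hp3]
  · have hp : l.Perm (["top", "left"]) := (List.perm_ext_iff_of_nodup hn (by decide)).2
      (fun a => by rw [h a]; simp [hp0, hp1, hp2, hp3])
    rw [hp.length_eq]
    simp [hp0, hp1, hp2, hp3]
  · have hp : l.Perm (["top", "right"]) := (List.perm_ext_iff_of_nodup hn (by decide)).2
      (fun a => by rw [h a]; simp [hp0, hp1, hp2, hp3])
    rw [hp.length_eq]
    simp [hp0, hp1, hp2, hp3]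
  · have hp : l.Perm (["top"]) := (List.perm_ext_iff_of_nodup hn (by decide)).2
      (fun a => by rw [h a]; simp [hp0, hp1, hp2, hp3])
    rw [hp.length_eq]
    simp [hp0, hp1, hp2, hp3]
  · have hp : l.Perm (["bottom", "left", "right"]) := (List.perm_ext_iff_of_nodup hn (by decide)).2
      (fun a => by rw [h a]; simp [hp0, hp1, hp2, hp3])
    rw [hp.length_eq]
    simp [hp0, hp1, hp2, hp3]
  · have hp : l.Perm (["bottom", "left"]) := (List.perm_ext_iff_of_nodup hn (by decide)).2
      (fun a => by rw [h a]; simp [hp0, hp1, hp2, hp3])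
    rw [hp.length_eq]
    simp [hp0, hp1, hp2, hp3]
  · have hp : l.Perm (["bottom", "right"]) := (List.perm_ext_iff_of_nodup hn (by decide)).2
      (fun a => by rw [h a]; simp [hp0, hp1, hp2, hp3])
    rw [hp.length_eq]
    simp [hp0, hp1, hp2, hp3]
  · have hp : l.Perm (["bottom"]) := (List.perm_ext_iff_of_nodup hn (by decide)).2
      (fun a => by rw [h a]; simp [hp0, hp1, hp2, hp3])
    rw [hp.length_eq]
    simp [hp0, hp1, hp2, hp3]
  · have hp : l.Perm (["left", "right"]) := (List.perm_ext_iff_of_nodup hn (by decide)).2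
      (fun a => by rw [h a]; simp [hp0, hp1, hp2, hp3])
    rw [hp.length_eq]
    simp [hp0, hp1, hp2, hp3]
  · have hp : l.Perm (["left"]) := (List.perm_ext_iff_of_nodup hn (by decide)).2
      (fun a => by rw [h a]; simp [hp0, hp1, hp2, hp3])
    rw [hp.length_eq]
    simp [hp0, hp1, hp2, hp3]
  · have hp : l.Perm (["right"]) := (List.perm_ext_iff_of_nodup hn (by decide)).2
      (fun a => by rw [h a]; simp [hp0, hp1, hp2, hp3])
    rw [hp.length_eq]
    simp [hp0, hp1, hp2, hp3]
  · have hp : l.Perm (([] : List String)) := (List.perm_ext_iff_of_nodup hn (by decide)).2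
      (fun a => by rw [h a]; simp [hp0, hp1, hp2, hp3])
    rw [hp.length_eq]
    simp [hp0, hp1, hp2, hp3]

lemma pvTouch_pvLb (grid : List (List Int)) (c : Nat × Nat) :
    pvTouch (pvLb grid c) = @ite _ (TouchN grid c 0) (Classical.propDecidable _) (1 : Int) 0 +
      @ite _ (TouchN grid c 1) (Classical.propDecidable _) 1 0 +
      @ite _ (TouchN grid c 2) (Classical.propDecidable _) 1 0 +
      @ite _ (TouchN grid c 3) (Classical.propDecidable _) 1 0 := by
  unfold pvTouch pvLb
  by_cases h0 : TouchN grid c 0 <;> by_cases h1 : TouchN grid c 1 <;>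
    by_cases h2 : TouchN grid c 2 <;> by_cases h3 : TouchN grid c 3 <;>
    simp [h0, h1, h2, h3]

lemma zc_col_lt (grid : List (List Int)) (a b : Nat) (hz : zcN grid a b) :
    b < (grid.getD a []).length := by
  by_contra hcon
  have : pvCellN grid a b = 1 := by
    unfold pvCellN
    exact List.getD_eq_default _ _ (by omega)
  have := hz.2.2
  omega

lemma borders_len (grid : List (List Int)) (s : Nat × Nat) (comp : List (Int × Int))
    (hrep : ∀ c ∈ comp, ∃ a b : Nat, c = ((a : Int), (b : Int)) ∧ zcN grid a b ∧
      ReachN grid s (a, b))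
    (hmem : ∀ p q : Nat, ((p : Int), (q : Int)) ∈ comp ↔ ReachN grid s (p, q)) :
    PySem.List.len (comp.foldl (bordF grid) PySem.Set.empty) = pvTouch (pvLb grid s) := by
  have hnd : (comp.foldl (bordF grid) PySem.Set.empty).Nodup :=
    bord_fold_nodup grid comp PySem.Set.empty (by simp [PySem.Set.empty])
  have hx : ∀ x, x ∈ comp.foldl (bordF grid) PySem.Set.empty ↔
      (x = "top" ∧ TouchN grid s 0) ∨ (x = "bottom" ∧ TouchN grid s 1) ∨
      (x = "left" ∧ TouchN grid s 2) ∨ (x = "right" ∧ TouchN grid s 3) := by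
    intro x
    rw [bord_fold_mem]
    have e0 : (∃ c ∈ comp, c.1 = 0) ↔ TouchN grid s 0 := by
      constructor
      · rintro ⟨c, hc, h0⟩
        obtain ⟨a, b, rfl, hz, hr⟩ := hrep c hc
        exact ⟨(a, b), hr, show a = 0 by
          have : (a : Int) = 0 := h0
          omega⟩
      · rintro ⟨d, hr, hside⟩
        refine ⟨((d.1 : Int), (d.2 : Int)), (hmem d.1 d.2).2 (by simpa using hr), ?_⟩
        have : d.1 = 0 := hside
        simp [this]
    have e1 : (∃ c ∈ comp, c.1 = (gH grid : Int) - 1) ↔ TouchN grid s 1 := by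
      constructor
      · rintro ⟨c, hc, h0⟩
        obtain ⟨a, b, rfl, hz, hr⟩ := hrep c hc
        have hb := hz.1
        exact ⟨(a, b), hr, show a + 1 = gH grid by
          have : (a : Int) = (gH grid : Int) - 1 := h0
          omega⟩
      · rintro ⟨d, hr, hside⟩
        refine ⟨((d.1 : Int), (d.2 : Int)), (hmem d.1 d.2).2 (by simpa using hr), ?_⟩
        have : d.1 + 1 = gH grid := hside
        show (d.1 : Int) = (gH grid : Int) - 1
        omega
    have e2 : (∃ c ∈ comp, c.2 = 0) ↔ TouchN grid s 2 := by
      constructor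
      · rintro ⟨c, hc, h0⟩
        obtain ⟨a, b, rfl, hz, hr⟩ := hrep c hc
        exact ⟨(a, b), hr, show b = 0 by
          have : (b : Int) = 0 := h0
          omega⟩
      · rintro ⟨d, hr, hside⟩
        refine ⟨((d.1 : Int), (d.2 : Int)), (hmem d.1 d.2).2 (by simpa using hr), ?_⟩
        have : d.2 = 0 := hside
        simp [this]
    have e3 : (∃ c ∈ comp, c.2 = (gW grid : Int) - 1) ↔ TouchN grid s 3 := by
      constructor
      · rintro ⟨c, hc, h0⟩
        obtain ⟨a, b, rfl, hz, hr⟩ := hrep c hc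
        have hb := hz.2.1
        exact ⟨(a, b), hr, show b + 1 = gW grid by
          have : (b : Int) = (gW grid : Int) - 1 := h0
          omega⟩
      · rintro ⟨d, hr, hside⟩
        refine ⟨((d.1 : Int), (d.2 : Int)), (hmem d.1 d.2).2 (by simpa using hr), ?_⟩
        have : d.2 + 1 = gW grid := hside
        show (d.2 : Int) = (gW grid : Int) - 1
        omega
    rw [e0, e1, e2, e3]
    simp [PySem.Set.empty]
  rw [PySem.List.len_eq, nodup_four_length _ hnd _ _ _ _ hx, pvTouch_pvLb]

-- the output-writing loop 'for x, y in component: output[x][y] = 4'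
lemma write_fold (grid : List (List Int)) :
    ∀ (comp : List (Int × Int)) (out : List (List Int)),
      (∀ c ∈ comp, ∃ a b : Nat, c = ((a : Int), (b : Int)) ∧ a < out.length ∧
        b < (out.getD a []).length) →
      ((comp.foldl (fun o (c : Int × Int) => pvSet2 o c.1 c.2 (4 : Int)) out).length
          = out.length ∧
        (∀ a : Nat, ((comp.foldl (fun o (c : Int × Int) => pvSet2 o c.1 c.2 (4 : Int))
            out).getD a []).length = (out.getD a []).length)) ∧
      (∀ a b : Nat, rAt (comp.foldl (fun o (c : Int × Int) => pvSet2 o c.1 c.2 (4 : Int)) out)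
          a b 0 = if ((a : Int), (b : Int)) ∈ comp then 4 else rAt out a b 0) := by
  intro comp
  induction comp with
  | nil =>
    intro out _
    simp
  | cons c t ih =>
    intro out hrep
    obtain ⟨p, q, rfl, hp, hq⟩ := hrep _ (List.mem_cons_self)
    rw [List.foldl_cons]
    have hset : pvSet2 out ((p : Int), (q : Int)).1 ((p : Int), (q : Int)).2 (4 : Int) =
        out.set p ((out.getD p []).set q 4) := set2_natCast out p q 4
    rw [hset]
    obtain ⟨⟨hl, hrl⟩, hread⟩ := ih (out.set p ((out.getD p []).set q 4)) (by
      intro c hc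
      obtain ⟨a, b, rfl, ha, hb⟩ := hrep c (List.mem_cons_of_mem _ hc)
      exact ⟨a, b, rfl, by rw [List.length_set]; omega, by rw [set2_row_lengths]; omega⟩)
    refine ⟨⟨by rw [hl, List.length_set], fun a => by rw [hrl a, set2_row_lengths]⟩, ?_⟩
    intro a b
    rw [hread a b]
    by_cases hmem : ((a : Int), (b : Int)) ∈ t
    · rw [if_pos hmem, if_pos (List.mem_cons_of_mem _ hmem)]
    · rw [if_neg hmem]
      by_cases he : a = p ∧ b = q
      · obtain ⟨rfl, rfl⟩ := he
        rw [set2_read_same _ _ _ _ _ hp hq, if_pos (List.mem_cons_self)]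
      · rw [set2_read_other _ _ _ _ _ _ _ (by tauto), if_neg (by
          intro hc
          rcases List.mem_cons.1 hc with hc | hc
          · have e1 : a = p := by have := congrArg Prod.fst hc; simpa using this
            have e2 : b = q := by have := congrArg Prod.snd hc; simpa using this
            exact he ⟨e1, e2⟩
          · exact hmem hc)]
-- the body of the outer double loop of A (the port's inner fold function, named)
def bodyF (grid : List (List Int)) (i j : Int) (st : List (List Int) × List (List Bool)) :
    List (List Int) × List (List Bool) :=
  if pvAcell grid i j = 0 ∧ ¬ pvAvis st.2 i j = true then
    let r := pvDfs grid (PySem.List.len grid) (PySem.List.len (grid.headD [])) i j st.2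
    let borders := r.2.foldl (bordF grid) PySem.Set.empty
    (if PySem.List.len borders ≤ 1 then
        r.2.foldl (fun o (c : Int × Int) => pvSet2 o c.1 c.2 (4 : Int)) st.1
      else st.1, r.1)
  else st

def OInv (grid : List (List Int)) (N : Nat) (st : List (List Int) × List (List Bool)) : Prop :=
  shapeV grid st.2 ∧
  st.1.length = grid.length ∧
  (∀ a : Nat, (st.1.getD a []).length = (grid.getD a []).length) ∧
  (∀ a b : Nat, vAt st.2 a b = true → zcN grid a b) ∧
  (∀ a b : Nat, vAt st.2 a b = true → ∀ p q : Nat, AdjN grid (a, b) (p, q) →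
    vAt st.2 p q = true) ∧
  (∀ a b : Nat, zcN grid a b → a * gW grid + b < N → vAt st.2 a b = true) ∧
  (∀ a b : Nat, rAt st.1 a b 0 =
    @ite _ (zcN grid a b ∧ vAt st.2 a b = true ∧ FillP grid (a, b))
      (Classical.propDecidable _) 4 (rAt grid a b 0))

lemma rowmajor_unique (W a b i j : Nat) (hb : b < W) (hj : j < W)
    (h : a * W + b = i * W + j) : a = i ∧ b = j := by
  have h1 : a = i := by
    rcases Nat.lt_trichotomy a i with hlt | he | hgt
    · exfalso
      have : a * W + W ≤ i * W := by
        calc a * W + W = (a + 1) * W := by ring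
          _ ≤ i * W := Nat.mul_le_mul_right W hlt
      omega
    · exact he
    · exfalso
      have : i * W + W ≤ a * W := by
        calc i * W + W = (i + 1) * W := by ring
          _ ≤ a * W := Nat.mul_le_mul_right W hgt
      omega
  subst h1
  exact ⟨rfl, by omega⟩

lemma body_step (grid : List (List Int)) (i j : Nat) (hi : i < gH grid) (hj : j < gW grid)
    (st : List (List Int) × List (List Bool)) (hI : OInv grid (i * gW grid + j) st) :
    OInv grid (i * gW grid + j + 1) (bodyF grid (i : Int) (j : Int) st) := by
  obtain ⟨hsh, holen, horl, hvz, hvc, hpre, hout⟩ := hI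
  unfold bodyF
  rw [acell_natCast, avis_eq grid st.2 hsh i j hi hj]
  by_cases hcond : pvCellN grid i j = 0 ∧ ¬ vAt st.2 i j = true
  · obtain ⟨hcell, hvisf⟩ := hcond
    have hz : zcN grid i j := ⟨hi, hj, hcell⟩
    have hfresh : vAt st.2 i j = false := by
      cases h : vAt st.2 i j
      · rfl
      · exact absurd h hvisf
    rw [if_pos ⟨hcell, hvisf⟩]
    rw [show PySem.List.len grid = (gH grid : Int) by simp [gH],
        show PySem.List.len (grid.headD []) = (gW grid : Int) by simp [gW]]
    obtain ⟨⟨hsh', hcomp', _, hiff', hdisj', hclo'⟩, hstart⟩ :=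
      dfs_spec grid st.2 i j hz hsh hfresh
    have hmemiff := comp_char grid st.2 i j hz hsh hfresh hvc
    set r := pvDfs grid (gH grid : Int) (gW grid : Int) (i : Int) (j : Int) st.2 with hr
    dsimp only
    have hrep : ∀ c ∈ r.2, ∃ a b : Nat, c = ((a : Int), (b : Int)) ∧ zcN grid a b ∧
        ReachN grid (i, j) (a, b) := hcomp'
    have hblen : PySem.List.len (r.2.foldl (bordF grid) PySem.Set.empty) =
        pvTouch (pvLb grid (i, j)) := borders_len grid (i, j) r.2 hrep hmemiff
    -- facts about the new visited matrix
    have hmono : ∀ a b : Nat, vAt st.2 a b = true → vAt r.1 a b = true :=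
      fun a b h => (hiff' a b).2 (Or.inl h)
    have hvz' : ∀ a b : Nat, vAt r.1 a b = true → zcN grid a b := by
      intro a b h
      rcases (hiff' a b).1 h with h | h
      · exact hvz a b h
      · obtain ⟨p, q, heq, hzp, _⟩ := hcomp' _ h
        have e1 : a = p := by have := congrArg Prod.fst heq; simpa using this
        have e2 : b = q := by have := congrArg Prod.snd heq; simpa using this
        rw [e1, e2]; exact hzp
    have hvc' : ∀ a b : Nat, vAt r.1 a b = true → ∀ p q : Nat, AdjN grid (a, b) (p, q) →
        vAt r.1 p q = true := by
      intro a b h p q hadj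
      rcases (hiff' a b).1 h with h | h
      · exact hmono p q (hvc a b h p q hadj)
      · apply hclo' _ h (List.not_mem_nil) (List.not_mem_nil) p q
        simpa using hadj
    have hpre' : ∀ a b : Nat, zcN grid a b → a * gW grid + b < i * gW grid + j + 1 →
        vAt r.1 a b = true := by
      intro a b hzab hlt
      by_cases he : a = i ∧ b = j
      · obtain ⟨rfl, rfl⟩ := he
        exact (hiff' a b).2 (Or.inr hstart)
      · apply hmono
        apply hpre a b hzab
        have hbW := hzab.2.1
        rcases Nat.lt_or_ge (a * gW grid + b) (i * gW grid + j) with h | h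
        · exact h
        · exfalso
          have hEq : a * gW grid + b = i * gW grid + j := by omega
          exact he (rowmajor_unique (gW grid) a b i j hbW hj hEq)
    have hsame : ∀ a b : Nat, ((a : Int), (b : Int)) ∉ r.2 →
        vAt r.1 a b = vAt st.2 a b := by
      intro a b hmem
      by_cases h2 : vAt st.2 a b = true
      · rw [h2, hmono a b h2]
      · have h1 : vAt r.1 a b = false := by
          cases hh : vAt r.1 a b
          · rfl
          · rcases (hiff' a b).1 hh with hx | hx
            · exact absurd hx h2
            · exact absurd hx hmem
        have h2' : vAt st.2 a b = false := by
          cases hx : vAt st.2 a b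
          · rfl
          · exact absurd hx h2
        rw [h1, h2']
    by_cases hfill : FillP grid (i, j)
    · rw [if_pos (show PySem.List.len (r.2.foldl (bordF grid) PySem.Set.empty) ≤ 1 by
        rw [hblen]; exact hfill)]
      have hwrep : ∀ c ∈ r.2, ∃ a b : Nat, c = ((a : Int), (b : Int)) ∧ a < st.1.length ∧
          b < (st.1.getD a []).length := by
        intro c hc
        obtain ⟨a, b, rfl, hzab, _⟩ := hcomp' c hc
        refine ⟨a, b, rfl, ?_, ?_⟩
        · rw [holen]; exact hzab.1
        · rw [horl a]; exact zc_col_lt grid a b hzab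
      obtain ⟨⟨hwl, hwrl⟩, hwread⟩ := write_fold grid r.2 st.1 hwrep
      refine ⟨hsh', by rw [hwl, holen], fun a => by rw [hwrl a, horl a], hvz', hvc', hpre', ?_⟩
      intro a b
      rw [show rAt (r.2.foldl (fun o (c : Int × Int) => pvSet2 o c.1 c.2 (4 : Int)) st.1, r.1).1
          a b 0 = rAt (r.2.foldl (fun o (c : Int × Int) => pvSet2 o c.1 c.2 (4 : Int)) st.1)
          a b 0 from rfl, hwread a b]
      by_cases hmem : ((a : Int), (b : Int)) ∈ r.2
      · rw [if_pos hmem]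
        obtain ⟨p, q, heq, hzp, _⟩ := hcomp' _ hmem
        have e1 : a = p := by have := congrArg Prod.fst heq; simpa using this
        have e2 : b = q := by have := congrArg Prod.snd heq; simpa using this
        have hzab : zcN grid a b := by rw [e1, e2]; exact hzp
        have hreach : ReachN grid (i, j) (a, b) := (hmemiff a b).1 hmem
        rw [if_pos ⟨hzab, (hiff' a b).2 (Or.inr hmem),
          (fill_congr grid (i, j) (a, b) hreach).mpr hfill⟩]
      · rw [if_neg hmem, hout a b]
        by_cases hc2 : zcN grid a b ∧ vAt st.2 a b = true ∧ FillP grid (a, b)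
        · rw [if_pos hc2, if_pos ⟨hc2.1, hmono a b hc2.2.1, hc2.2.2⟩]
        · rw [if_neg hc2, if_neg (by
            rintro ⟨hx1, hx2, hx3⟩
            rw [hsame a b hmem] at hx2
            exact hc2 ⟨hx1, hx2, hx3⟩)]
    · rw [if_neg (show ¬ PySem.List.len (r.2.foldl (bordF grid) PySem.Set.empty) ≤ 1 by
        rw [hblen]; exact fun h => hfill h)]
      refine ⟨hsh', holen, horl, hvz', hvc', hpre', ?_⟩
      intro a b
      rw [show rAt (st.1, r.1).1 a b 0 = rAt st.1 a b 0 from rfl, hout a b]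
      by_cases hmem : ((a : Int), (b : Int)) ∈ r.2
      · have hreach : ReachN grid (i, j) (a, b) := (hmemiff a b).1 hmem
        have hnotv : vAt st.2 a b = false := by
          cases hx : vAt st.2 a b
          · rfl
          · exact absurd hmem (hdisj' a b hx)
        have hfa : ¬ FillP grid (a, b) :=
          fun hf => hfill ((fill_congr grid (i, j) (a, b) hreach).mp hf)
        rw [if_neg (by rintro ⟨_, hv, _⟩; rw [hnotv] at hv; exact absurd hv (by simp)),
            if_neg (by rintro ⟨_, _, hf⟩; exact hfa hf)]
      · by_cases hc2 : zcN grid a b ∧ vAt st.2 a b = true ∧ FillP grid (a, b)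
        · rw [if_pos hc2, if_pos ⟨hc2.1, hmono a b hc2.2.1, hc2.2.2⟩]
        · rw [if_neg hc2, if_neg (by
            rintro ⟨hx1, hx2, hx3⟩
            rw [hsame a b hmem] at hx2
            exact hc2 ⟨hx1, hx2, hx3⟩)]
  · rw [if_neg hcond]
    refine ⟨hsh, holen, horl, hvz, hvc, ?_, hout⟩
    intro a b hzab hlt
    by_cases he : a = i ∧ b = j
    · obtain ⟨rfl, rfl⟩ := he
      rcases Decidable.em (vAt st.2 a b = true) with h | h
      · exact h
      · exfalso
        exact hcond ⟨hzab.2.2, fun hh => h hh⟩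
    · apply hpre a b hzab
      have hbW := hzab.2.1
      have hne : a * gW grid + b ≠ i * gW grid + j :=
        fun hEq => he (rowmajor_unique (gW grid) a b i j hbW hj hEq)
      omega
lemma inner_loop (grid : List (List Int)) (i : Nat) (hi : i < gH grid) :
    ∀ (n : Nat), n ≤ gW grid → ∀ st, OInv grid (i * gW grid) st →
      OInv grid (i * gW grid + n)
        ((PySem.List.pyRange 0 (n : Int) 1).foldl
          (fun st j => bodyF grid (i : Int) j st) st) := by
  intro n
  induction n with
  | zero =>
    intro _ st h
    simp only [Nat.cast_zero]
    rw [PySem.List.pyRange_one_eq_nil (le_refl 0), List.foldl_nil]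
    exact h
  | succ n ih =>
    intro hn st h
    rw [show ((n + 1 : Nat) : Int) = (n : Int) + 1 by push_cast; ring,
        PySem.List.pyRange_one_succ_right (by omega : (0 : Int) ≤ (n : Int)),
        List.foldl_append, List.foldl_cons, List.foldl_nil]
    exact body_step grid i n hi (by omega) _ (ih (by omega) st h)

lemma outer_loop (grid : List (List Int)) :
    ∀ (m : Nat), m ≤ gH grid → ∀ st, OInv grid 0 st →
      OInv grid (m * gW grid)
        ((PySem.List.pyRange 0 (m : Int) 1).foldl
          (fun st i => (PySem.List.pyRange 0 (gW grid : Int) 1).foldl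
            (fun st j => bodyF grid i j st) st) st) := by
  intro m
  induction m with
  | zero =>
    intro _ st h
    simp only [Nat.cast_zero]
    rw [PySem.List.pyRange_one_eq_nil (le_refl 0), List.foldl_nil, Nat.zero_mul]
    exact h
  | succ m ih =>
    intro hm st h
    rw [show ((m + 1 : Nat) : Int) = (m : Int) + 1 by push_cast; ring,
        PySem.List.pyRange_one_succ_right (by omega : (0 : Int) ≤ (m : Int)),
        List.foldl_append, List.foldl_cons, List.foldl_nil,
        show (m + 1) * gW grid = m * gW grid + gW grid from Nat.succ_mul _ _]
    exact inner_loop grid m (by omega) (gW grid) le_rfl _ (ih (by omega) st h)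

lemma init_OInv (grid : List (List Int)) :
    OInv grid 0 (grid, (PySem.List.pyRange 0 (gH grid : Int) 1).map (fun _ =>
      (PySem.List.pyRange 0 (gW grid : Int) 1).map (fun _ => false))) := by
  set vis0 := (PySem.List.pyRange 0 (gH grid : Int) 1).map (fun _ =>
    (PySem.List.pyRange 0 (gW grid : Int) 1).map (fun _ => false)) with hv
  have hvfalse : ∀ a b : Nat, vAt vis0 a b = false := by
    intro a b
    unfold vAt
    rw [hv]
    by_cases ha : a < gH grid
    · rw [getDmr _ _ _ _ ha]
      by_cases hb : b < gW grid
      · rw [getDmr _ _ _ _ hb]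
      · exact List.getD_eq_default _ _ (by
          rw [List.length_map, PySem.List.length_pyRange_one]; omega)
    · have houter : (List.map (fun _ => List.map (fun _ => false)
          (PySem.List.pyRange 0 (gW grid : Int) 1))
          (PySem.List.pyRange 0 (gH grid : Int) 1)).getD a [] = [] :=
        List.getD_eq_default _ _ (by
          rw [List.length_map, PySem.List.length_pyRange_one]; omega)
      rw [houter]
      rfl
  refine ⟨⟨?_, ?_⟩, rfl, fun a => rfl, ?_, ?_, ?_, ?_⟩
  · rw [hv, List.length_map, PySem.List.length_pyRange_one]; omega
  · intro r hr
    rw [hv] at hr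
    simp only [List.mem_map] at hr
    obtain ⟨_, _, rfl⟩ := hr
    rw [List.length_map, PySem.List.length_pyRange_one]; omega
  · intro a b h
    rw [hvfalse a b] at h
    exact absurd h (by simp)
  · intro a b h
    rw [hvfalse a b] at h
    exact absurd h (by simp)
  · intro a b _ h
    omega
  · intro a b
    rw [if_neg (by
      rintro ⟨_, hvv, _⟩
      rw [hvfalse a b] at hvv
      exact absurd hvv (by simp))]

lemma a_char (grid : List (List Int)) : transform grid = refOut grid := by
  by_cases hg : grid = [] ∨ grid.headD [] = []
  · rw [transform, refOut, if_pos hg, if_pos hg]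
  · rw [transform, refOut, if_neg hg, if_neg hg]
    show ((PySem.List.pyRange 0 (PySem.List.len grid) 1).foldl
        (fun st i => (PySem.List.pyRange 0 (PySem.List.len (grid.headD [])) 1).foldl
          (fun (st : List (List Int) × List (List Bool)) j => bodyF grid i j st) st)
        (grid.map (fun row => PySem.List.slice row none none),
          (PySem.List.pyRange 0 (PySem.List.len grid) 1).map (fun _ =>
            (PySem.List.pyRange 0 (PySem.List.len (grid.headD [])) 1).map
              (fun _ => false)))).1 = _
    have hmap : grid.map (fun row => PySem.List.slice row none none) = grid := by
      calc grid.map (fun row => PySem.List.slice row none none) = grid.map id :=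
            List.map_congr_left (fun r _ => by simp [PySem.List.slice])
        _ = grid := List.map_id _
    rw [show PySem.List.len grid = (gH grid : Int) by simp [gH],
        show PySem.List.len (grid.headD []) = (gW grid : Int) by simp [gW], hmap]
    obtain ⟨hsh, holen, horl, hvz, hvc, hpre, hout⟩ :=
      outer_loop grid (gH grid) le_rfl _ (init_OInv grid)
    set stF := (PySem.List.pyRange 0 ((gH grid : Nat) : Int) 1).foldl
      (fun st i => (PySem.List.pyRange 0 (gW grid : Int) 1).foldl
        (fun st j => bodyF grid i j st) st)
      (grid, (PySem.List.pyRange 0 (gH grid : Int) 1).map (fun _ =>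
        (PySem.List.pyRange 0 (gW grid : Int) 1).map (fun _ => false))) with hstF
    refine List.ext_getElem (by rw [holen, List.length_mapIdx]) (fun a h1 h2 => ?_)
    have haH : a < gH grid := by have := h1; rw [holen] at this; exact this
    rw [List.getElem_mapIdx]
    have hrl : stF.1[a].length = grid[a].length := by
      have := horl a
      rw [List.getD_eq_getElem _ _ h1, List.getD_eq_getElem _ _ haH] at this
      exact this
    refine List.ext_getElem (by rw [List.length_mapIdx, hrl]; rfl) (fun b hb1 hb2 => ?_)
    rw [List.getElem_mapIdx]
    have hbg : b < grid[a].length := by rw [← hrl]; exact hb1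
    have hlhs : rAt stF.1 a b 0 = stF.1[a][b] := by
      unfold rAt
      rw [List.getD_eq_getElem _ _ h1, List.getD_eq_getElem _ _ hb1]
    have hrhs : rAt grid a b 0 = grid[a][b] := by
      unfold rAt
      rw [List.getD_eq_getElem _ _ haH, List.getD_eq_getElem _ _ hbg]
    rw [← hlhs, hout a b, hrhs]
    by_cases hc : zcN grid a b ∧ pvTouch (pvLb grid (a, b)) ≤ 1
    · have hvis : vAt stF.2 a b = true := by
        apply hpre a b hc.1
        have hbW : b < gW grid := hc.1.2.1
        calc a * gW grid + b < a * gW grid + gW grid := by omega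
          _ = (a + 1) * gW grid := by ring
          _ ≤ gH grid * gW grid := Nat.mul_le_mul_right _ (by omega)
      rw [if_pos ⟨hc.1, hvis, hc.2⟩, if_pos hc]
    · rw [if_neg (by rintro ⟨hx1, _, hx3⟩; exact hc ⟨hx1, hx3⟩), if_neg hc]
      rfl

-- ===== VERDICT (by name: the statement is the Claim_ definition above) =====
theorem transform_spec : Claim_equal_transform := by
  intro grid _ _
  show transform grid = transform_alt grid
  rw [a_char, alt_char]
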